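-- pv_equiv track=rewrite | github.com/kimjueun028/CodingTest | 프로그래머스/2/77485. 행렬 테두리 회전하기/행렬 테두리 회전하기.py | solution
-- ===== SOURCE A (Python) =====
-- def solution(rows, columns, queries):
--     answer = []
--     # for i in range(rows):
--     #     for j in range(columns):
--     #         board[i][j] = columns*i+j+1
--     board = [[columns*i + j + 1 for j in range(columns)] for i in range(rows)]
--
--     for x1, y1, x2, y2 in queries:
--         keys = []
--         keys.extend([(x1, y) for y in range(y1, y2)])   # x1, y1 -> x1, y2
--         keys.extend([(x, y2) for x in range(x1, x2)])   # x1, y2 -> x2, y2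
--         keys.extend([(x2, y) for y in range(y2, y1, -1)])   # x2, y2 -> x2, y1
--         keys.extend([(x, y1) for x in range(x1+1, x2+1)][::-1])   # x2, y1 -> x1, y1
--
--         values = []
--         for x, y in keys:
--             values.append(board[x-1][y-1])
--
--         values = [values[-1]] + values[:-1]
--         for i in range(len(keys)):
--             x = keys[i][0]
--             y = keys[i][1]
--             board[x-1][y-1] = values[i]
--         answer.append(min(values))
--     return answer
-- ===== SOURCE B (Python) =====
-- def solution(rows, columns, queries):
--     # In-place border rotation: four pull/push loops and a saved corner,
--     # instead of building keys/values lists per query.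
--     board = [[columns * i + j + 1 for j in range(columns)] for i in range(rows)]
--     answer = []
--     for x1, y1, x2, y2 in queries:
--         a, b, c, d = x1 - 1, y1 - 1, x2 - 1, y2 - 1
--         temp = board[a][b]
--         m = temp
--         for i in range(a, c):          # left column pulled up
--             v = board[i + 1][b]
--             board[i][b] = v
--             if v < m:
--                 m = v
--         for j in range(b, d):          # bottom row pulled left
--             v = board[c][j + 1]
--             board[c][j] = v
--             if v < m:
--                 m = v
--         for i in range(c, a, -1):      # right column pushed down
--             v = board[i - 1][d]
--             board[i][d] = v
--             if v < m:
--                 m = v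
--         for j in range(d, b + 1, -1):  # top row pushed right
--             v = board[a][j - 1]
--             board[a][j] = v
--             if v < m:
--                 m = v
--         board[a][b + 1] = temp
--         answer.append(m)
--     return answer
-- ===== Notes on version B (the rewrite author's own statement) =====
-- stated objective: alternative
-- what changed: Instead of materialising the clockwise keys list, reading all border values into a values list, rotating that list and writing it back, B rotates each query's border in place with four pull/push loops around a saved corner cell while maintaining a running minimum.
-- outside the precondition, e.g. on solution(5, 2, [(5, -1, -4, 1)]): A returns [1], B returns [2]; on solution(3, 4, [(1, 4, 3, -3)]): A returns [1], B raises IndexError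
import Mathlib
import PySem

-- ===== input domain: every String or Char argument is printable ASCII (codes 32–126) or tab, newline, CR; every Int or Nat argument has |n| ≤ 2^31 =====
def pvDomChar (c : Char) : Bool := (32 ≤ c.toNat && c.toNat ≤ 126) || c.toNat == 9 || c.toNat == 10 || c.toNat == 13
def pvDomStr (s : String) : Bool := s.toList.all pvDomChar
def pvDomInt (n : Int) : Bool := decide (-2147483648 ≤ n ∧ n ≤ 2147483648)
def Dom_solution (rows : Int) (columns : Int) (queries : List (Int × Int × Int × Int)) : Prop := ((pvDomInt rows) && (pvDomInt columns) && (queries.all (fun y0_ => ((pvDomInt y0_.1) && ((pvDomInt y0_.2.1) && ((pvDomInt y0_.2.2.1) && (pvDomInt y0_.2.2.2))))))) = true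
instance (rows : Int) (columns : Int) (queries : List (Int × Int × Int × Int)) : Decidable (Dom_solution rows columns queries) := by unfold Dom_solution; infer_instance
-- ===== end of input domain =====

-- B rotates each query's border in place with four pull/push loops and a saved corner
-- instead of building keys/values lists and writing a rotated copy back (alternative
-- decomposition, same asymptotic cost); return values proved equal on Pre_.

-- board[x][y] read/write, Python semantics (negative wrap; out-of-range returns the
-- default / leaves the board unchanged where Python raises — such inputs are outside Pre_).
def cellGet (bd : List (List Int)) (x y : Int) : Int :=
  PySem.List.pyGetD (PySem.List.pyGetD bd x []) y 0

def cellSet (bd : List (List Int)) (x y : Int) (v : Int) : List (List Int) :=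
  PySem.List.pySetD bd x (PySem.List.pySetD (PySem.List.pyGetD bd x []) y v)

-- board = [[columns*i + j + 1 for j in range(columns)] for i in range(rows)]  (same line in A and B)
def mkBoard (rows columns : Int) : List (List Int) :=
  (PySem.List.pyRange 0 rows 1).map (fun i => (PySem.List.pyRange 0 columns 1).map (fun j => columns * i + j + 1))

-- ===== PORT A =====
-- one iteration of A's query loop
def stepA (st : List (List Int) × List Int) (q : Int × Int × Int × Int) : List (List Int) × List Int :=
  let x1 := q.1; let y1 := q.2.1; let x2 := q.2.2.1; let y2 := q.2.2.2
  let board := st.1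
  let keys : List (Int × Int) :=
    ((PySem.List.pyRange y1 y2 1).map (fun y => (x1, y))) ++
    ((PySem.List.pyRange x1 x2 1).map (fun x => (x, y2))) ++
    ((PySem.List.pyRange y2 y1 (-1)).map (fun y => (x2, y))) ++
    (((PySem.List.pyRange (x1 + 1) (x2 + 1) 1).map (fun x => (x, y1))).reverse)  -- [::-1] (slice?_none_none_neg_one)
  let values := keys.foldl (fun acc p => acc ++ [cellGet board (p.1 - 1) (p.2 - 1)]) ([] : List Int)
  -- values = [values[-1]] + values[:-1]   (values[-1] exact under Pre_: keys ≠ [])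
  let values2 := [PySem.List.pyGetD values (-1) 0] ++ PySem.List.slice values none (some (-1))
  let board' := (PySem.List.pyRange 0 (keys.length : Int) 1).foldl (fun bd i =>
      cellSet bd ((PySem.List.pyGetD keys i (0, 0)).1 - 1) ((PySem.List.pyGetD keys i (0, 0)).2 - 1)
        (PySem.List.pyGetD values2 i 0)) board
  -- min(values) exact under Pre_ (values2 ≠ [])
  (board', st.2 ++ [(PySem.List.min? values2 (fun v => v)).getD 0])

def solution (rows : Int) (columns : Int) (queries : List (Int × Int × Int × Int)) : List Int :=
  (queries.foldl stepA (mkBoard rows columns, [])).2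

-- ===== PORT B =====
-- one iteration of B's query loop: four in-place pull/push loops around a saved corner
def stepB (st : List (List Int) × List Int) (q : Int × Int × Int × Int) : List (List Int) × List Int :=
  let x1 := q.1; let y1 := q.2.1; let x2 := q.2.2.1; let y2 := q.2.2.2
  let a := x1 - 1; let b := y1 - 1; let c := x2 - 1; let d := y2 - 1
  let temp := cellGet st.1 a b
  let s1 := (PySem.List.pyRange a c 1).foldl (fun (p : List (List Int) × Int) i =>
      let v := cellGet p.1 (i + 1) b
      (cellSet p.1 i b v, if v < p.2 then v else p.2)) (st.1, temp)
  let s2 := (PySem.List.pyRange b d 1).foldl (fun p j =>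
      let v := cellGet p.1 c (j + 1)
      (cellSet p.1 c j v, if v < p.2 then v else p.2)) s1
  let s3 := (PySem.List.pyRange c a (-1)).foldl (fun p i =>
      let v := cellGet p.1 (i - 1) d
      (cellSet p.1 i d v, if v < p.2 then v else p.2)) s2
  let s4 := (PySem.List.pyRange d (b + 1) (-1)).foldl (fun p j =>
      let v := cellGet p.1 a (j - 1)
      (cellSet p.1 a j v, if v < p.2 then v else p.2)) s3
  (cellSet s4.1 a (b + 1) temp, st.2 ++ [s4.2])

def solution_alt (rows : Int) (columns : Int) (queries : List (Int × Int × Int × Int)) : List Int :=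
  (queries.foldl stepB (mkBoard rows columns, [])).2

-- ===== PRECONDITION & SPEC =====
-- Pre_ restricts every query to the board's bounds, the published contract of this
-- puzzle (1 ≤ x1 < x2 ≤ rows, 1 ≤ y1 < y2 ≤ columns).  Outside it A either raises
-- (IndexError / min of an empty sequence) or returns a value produced by Python's
-- silent negative-index wraparound — a corner no one would specify — and B may
-- raise or return a different wrapped value there.
def Pre_solution (rows : Int) (columns : Int) (queries : List (Int × Int × Int × Int)) : Prop :=
  ∀ q ∈ queries, 1 ≤ q.1 ∧ q.1 < q.2.2.1 ∧ q.2.2.1 ≤ rows ∧ 1 ≤ q.2.1 ∧ q.2.1 < q.2.2.2 ∧ q.2.2.2 ≤ columns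
instance (rows : Int) (columns : Int) (queries : List (Int × Int × Int × Int)) : Decidable (Pre_solution rows columns queries) := by unfold Pre_solution; infer_instance

def pvWitness_solution : Int × Int × (List (Int × Int × Int × Int)) := (3, 3, [(1, 1, 3, 3)])

def Spec_solution (rows : Int) (columns : Int) (queries : List (Int × Int × Int × Int)) (out : List Int) : Prop := out = solution_alt rows columns queries
instance (rows : Int) (columns : Int) (queries : List (Int × Int × Int × Int)) (out : List Int) : Decidable (Spec_solution rows columns queries out) := by unfold Spec_solution; infer_instance

-- ===== CLAIM (what is proved, stated in full; the proofs are below) =====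
def Claim_equal_solution : Prop := ∀ (rows : Int) (columns : Int) (queries : List (Int × Int × Int × Int)), Dom_solution rows columns queries → Pre_solution rows columns queries → Spec_solution rows columns queries (solution rows columns queries)


-- ===== LEMMAS AND PROOFS =====

-- ---- generic board machinery ----

-- index in range [0, n)
def InR (n : Nat) (t : Int) : Prop := 0 ≤ t ∧ t < (n : Int)

-- a rows×columns board
def Shape (R C : Nat) (bd : List (List Int)) : Prop :=
  bd.length = R ∧ ∀ r ∈ bd, r.length = C

-- apply a list of writes (position, value) left to right
def W (bd : List (List Int)) (ps : List ((Int × Int) × Int)) : List (List Int) :=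
  ps.foldl (fun bd pv => cellSet bd pv.1.1 pv.1.2 pv.2) bd

def PosOK (R C : Nat) (ps : List ((Int × Int) × Int)) : Prop :=
  ∀ pv ∈ ps, InR R pv.1.1 ∧ InR C pv.1.2

lemma cellGet_nonneg {bd : List (List Int)} {i j : Int} (h0 : 0 ≤ i) (h1 : 0 ≤ j) :
    cellGet bd i j = ((bd[i.toNat]?.getD [])[j.toNat]?).getD 0 := by
  unfold cellGet
  rw [PySem.List.pyGetD_of_nonneg _ _ h0, PySem.List.pyGetD_of_nonneg _ _ h1,
    List.getD_eq_getElem?_getD, List.getD_eq_getElem?_getD]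

lemma cellSet_nonneg {bd : List (List Int)} {x y : Int} (h0 : 0 ≤ x) (h1 : 0 ≤ y) (v : Int) :
    cellSet bd x y v = bd.set x.toNat ((bd[x.toNat]?.getD []).set y.toNat v) := by
  unfold cellSet
  rw [PySem.List.pySetD_of_nonneg _ _ h0, PySem.List.pySetD_of_nonneg _ _ h1,
    PySem.List.pyGetD_of_nonneg _ _ h0, List.getD_eq_getElem?_getD]

lemma cellGet_cellSet {R C : Nat} {bd : List (List Int)} (hs : Shape R C bd)
    {x y i j : Int} (hx : InR R x) (hy : InR C y) (hi : InR R i) (hj : InR C j) (v : Int) :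
    cellGet (cellSet bd x y v) i j = if i = x ∧ j = y then v else cellGet bd i j := by
  obtain ⟨hlen, hrow⟩ := hs
  obtain ⟨hx0, hx1⟩ := hx; obtain ⟨hy0, hy1⟩ := hy
  obtain ⟨hi0, hi1⟩ := hi; obtain ⟨hj0, hj1⟩ := hj
  have hxl : x.toNat < bd.length := by omega
  have hil : i.toNat < bd.length := by omega
  rw [cellSet_nonneg hx0 hy0, cellGet_nonneg hi0 hj0, cellGet_nonneg hi0 hj0]
  have hbdx : bd[x.toNat]? = some (bd[x.toNat]'hxl) := List.getElem?_eq_getElem hxl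
  have hrowlen : (bd[x.toNat]'hxl).length = C := hrow _ (List.getElem_mem _)
  rw [List.getElem?_set]
  by_cases hix : i = x
  · have hixt : x.toNat = i.toNat := by omega
    rw [if_pos hixt, if_pos hxl]
    simp only [Option.getD_some]
    rw [List.getElem?_set]
    have hjyl : y.toNat < (bd[x.toNat]?.getD []).length := by
      rw [hbdx]; simpa [hrowlen] using (by omega : y.toNat < C)
    by_cases hjy : j = y
    · have hjyt : y.toNat = j.toNat := by omega
      rw [if_pos hjyt, if_pos hjyl, if_pos ⟨hix, hjy⟩]
      simp
    · have hjyt : ¬ y.toNat = j.toNat := by omega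
      rw [if_neg hjyt, if_neg (by tauto)]
      rw [← hixt]
  · have hixt : ¬ x.toNat = i.toNat := by omega
    rw [if_neg hixt, if_neg (by tauto)]

lemma shape_cellSet {R C : Nat} {bd : List (List Int)} (hs : Shape R C bd)
    {x y : Int} (hx : InR R x) (hy : InR C y) (v : Int) : Shape R C (cellSet bd x y v) := by
  obtain ⟨hlen, hrow⟩ := hs
  have hxl : x.toNat < bd.length := by obtain ⟨hx0, hx1⟩ := hx; omega
  rw [cellSet_nonneg hx.1 hy.1]
  constructor
  · simp [hlen]
  · intro r hr
    rcases List.mem_or_eq_of_mem_set hr with h | h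
    · exact hrow r h
    · subst h
      rw [List.length_set, List.getElem?_eq_getElem hxl]
      exact hrow _ (List.getElem_mem _)

lemma shape_W {R C : Nat} {ps : List ((Int × Int) × Int)} {bd : List (List Int)}
    (hs : Shape R C bd) (hps : PosOK R C ps) : Shape R C (W bd ps) := by
  induction ps generalizing bd with
  | nil => exact hs
  | cons pv t ih =>
    have h := hps pv List.mem_cons_self
    exact ih (shape_cellSet hs h.1 h.2 pv.2) (fun q hq => hps q (List.mem_cons_of_mem _ hq))

lemma W_append (bd : List (List Int)) (ps qs : List ((Int × Int) × Int)) :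
    W bd (ps ++ qs) = W (W bd ps) qs := by
  unfold W; exact List.foldl_append

lemma lookup_cons_ne {p q : Int × Int} {v : Int} {t : List ((Int × Int) × Int)} (h : p ≠ q) :
    List.lookup p ((q, v) :: t) = List.lookup p t := by
  have : (p == q) = false := by simp [h]
  simp [List.lookup, this]

lemma lookup_eq_none_of_not_mem_fst {p : Int × Int} {ps : List ((Int × Int) × Int)}
    (h : p ∉ ps.map Prod.fst) : List.lookup p ps = none := by
  induction ps with
  | nil => rfl
  | cons pv t ih =>
    simp only [List.map_cons, List.mem_cons] at h
    push_neg at h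
    have : (p == pv.1) = false := by simp [h.1]
    simp only [List.lookup, this]
    exact ih h.2

lemma cellGet_W {R C : Nat} {ps : List ((Int × Int) × Int)} {bd : List (List Int)}
    (hs : Shape R C bd) (hps : PosOK R C ps) (hnd : (ps.map Prod.fst).Nodup)
    {i j : Int} (hi : InR R i) (hj : InR C j) :
    cellGet (W bd ps) i j = (List.lookup (i, j) ps).getD (cellGet bd i j) := by
  induction ps generalizing bd with
  | nil => rfl
  | cons pv t ih =>
    have hmem := hps pv List.mem_cons_self
    have hpst : PosOK R C t := fun q hq => hps q (List.mem_cons_of_mem _ hq)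
    simp only [List.map_cons, List.nodup_cons] at hnd
    have hW : W bd (pv :: t) = W (cellSet bd pv.1.1 pv.1.2 pv.2) t := rfl
    rw [hW, ih (shape_cellSet hs hmem.1 hmem.2 pv.2) hpst hnd.2]
    by_cases hp : (i, j) = pv.1
    · have : List.lookup (i, j) (pv :: t) = some pv.2 := by
        rcases pv with ⟨q, v⟩; rw [show (i,j) = q from hp]; exact List.lookup_cons_self
      rw [this, lookup_eq_none_of_not_mem_fst (hp ▸ hnd.1)]
      simp only [Option.getD_none, Option.getD_some]
      rw [cellGet_cellSet hs hmem.1 hmem.2 hi hj]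
      have : i = pv.1.1 ∧ j = pv.1.2 := by
        constructor <;> (rw [← hp])
      simp [this]
    · have : List.lookup (i, j) (pv :: t) = List.lookup (i, j) t := by
        rcases pv with ⟨q, v⟩; exact lookup_cons_ne hp
      rw [this]
      congr 1
      rw [cellGet_cellSet hs hmem.1 hmem.2 hi hj]
      have : ¬ (i = pv.1.1 ∧ j = pv.1.2) := by
        intro hc; exact hp (by rcases hc with ⟨h1, h2⟩; rw [h1, h2])
      simp [this]

lemma cellGet_W_not_mem {R C : Nat} {ps : List ((Int × Int) × Int)} {bd : List (List Int)}
    (hs : Shape R C bd) (hps : PosOK R C ps)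
    {i j : Int} (hi : InR R i) (hj : InR C j) (hnm : (i, j) ∉ ps.map Prod.fst) :
    cellGet (W bd ps) i j = cellGet bd i j := by
  induction ps generalizing bd with
  | nil => rfl
  | cons pv t ih =>
    have hmem := hps pv List.mem_cons_self
    simp only [List.map_cons, List.mem_cons] at hnm
    push_neg at hnm
    have hW : W bd (pv :: t) = W (cellSet bd pv.1.1 pv.1.2 pv.2) t := rfl
    rw [hW, ih (shape_cellSet hs hmem.1 hmem.2 pv.2) (fun q hq => hps q (List.mem_cons_of_mem _ hq)) hnm.2]
    rw [cellGet_cellSet hs hmem.1 hmem.2 hi hj]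
    have : ¬ (i = pv.1.1 ∧ j = pv.1.2) := by
      intro hc; exact hnm.1 (by rcases hc with ⟨h1, h2⟩; rw [h1, h2])
    simp [this]

lemma cellGet_getElem {R C : Nat} {bd : List (List Int)} (hs : Shape R C bd)
    {i j : Nat} (hi : i < R) (hj : j < C) (hi' : i < bd.length) (hj' : j < bd[i].length) :
    cellGet bd (i : Int) (j : Int) = bd[i][j] := by
  unfold cellGet
  have h1 : ((i : Int)) < (bd.length : Int) := by omega
  rw [PySem.List.pyGetD_eq_getElem bd [] (by positivity) h1]
  have h2 : ((j : Int)) < ((bd[(i:Int).toNat]'(by omega)).length : Int) := by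
    simp only [Int.toNat_natCast]; omega
  rw [PySem.List.pyGetD_eq_getElem _ 0 (by positivity) h2]
  simp

lemma boards_ext {R C : Nat} {bd1 bd2 : List (List Int)}
    (hs1 : Shape R C bd1) (hs2 : Shape R C bd2)
    (h : ∀ i j : Int, InR R i → InR C j → cellGet bd1 i j = cellGet bd2 i j) : bd1 = bd2 := by
  apply List.ext_getElem
  · rw [hs1.1, hs2.1]
  · intro i hi1 hi2
    apply List.ext_getElem
    · rw [hs1.2 _ (List.getElem_mem _), hs2.2 _ (List.getElem_mem _)]
    · intro j hj1 hj2
      have hiR : i < R := by rw [← hs1.1]; exact hi1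
      have hjC : j < C := by rw [← hs1.2 _ (List.getElem_mem hi1)]; exact hj1
      rw [← cellGet_getElem hs1 hiR hjC hi1 hj1, ← cellGet_getElem hs2 hiR hjC hi2 hj2]
      exact h i j ⟨by positivity, by omega⟩ ⟨by positivity, by omega⟩

-- ---- lookup helpers ----

lemma lookup_map_inj (pos : Int → Int × Int) (v : Int → Int) (l : List Int) (i : Int)
    (hinj : ∀ x y, pos x = pos y → x = y) (hi : i ∈ l) :
    List.lookup (pos i) (l.map (fun x => (pos x, v x))) = some (v i) := by
  induction l with
  | nil => cases hi
  | cons x t ih =>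
    by_cases hx : i = x
    · subst hx
      simp only [List.map_cons]
      exact List.lookup_cons_self
    · have hit : i ∈ t := by
        rcases List.mem_cons.mp hi with h | h
        · exact absurd h hx
        · exact h
      have hne : pos i ≠ pos x := fun h => hx (hinj _ _ h)
      simp only [List.map_cons]
      rw [lookup_cons_ne hne]
      exact ih hit

lemma lookup_map_not_mem (pos : Int → Int × Int) (v : Int → Int) (l : List Int) (p : Int × Int)
    (hp : ∀ x ∈ l, pos x ≠ p) :
    List.lookup p (l.map (fun x => (pos x, v x))) = none := by
  induction l with
  | nil => rfl
  | cons x t ih =>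
    simp only [List.map_cons]
    rw [lookup_cons_ne (hp x List.mem_cons_self).symm]
    exact ih (fun y hy => hp y (List.mem_cons_of_mem _ hy))

-- ---- range reindexing ----

lemma rngMapShift {α : Type} (s t k : Int) (f : Int → α) :
    (PySem.List.pyRange s t 1).map (fun y => f (y + k)) = (PySem.List.pyRange (s + k) (t + k) 1).map f := by
  rw [PySem.List.pyRange_one, PySem.List.pyRange_one, List.map_map, List.map_map]
  have hb : t + k - (s + k) = t - s := by ring
  rw [hb]
  apply List.map_congr_left
  intro m _
  simp only [Function.comp_apply]
  congr 1
  ring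

lemma rngMapShiftNeg {α : Type} (s t k : Int) (f : Int → α) :
    (PySem.List.pyRange s t (-1)).map (fun y => f (y + k)) = (PySem.List.pyRange (s + k) (t + k) (-1)).map f := by
  rw [PySem.List.pyRange_neg_one, PySem.List.pyRange_neg_one, List.map_map, List.map_map]
  have hb : s + k - (t + k) = s - t := by ring
  rw [hb]
  apply List.map_congr_left
  intro m _
  simp only [Function.comp_apply]
  congr 1
  ring

lemma revAsc {α : Type} (s t : Int) (f : Int → α) :
    ((PySem.List.pyRange s t 1).map f).reverse = (PySem.List.pyRange (t - 1) (s - 1) (-1)).map f := by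
  rw [PySem.List.pyRange_neg_one_eq_reverse]
  have h1 : s - 1 + 1 = s := by ring
  have h2 : t - 1 + 1 = t := by ring
  rw [h1, h2, List.map_reverse]

-- ---- adjacency (consecutive pairs) ----

def adj {α : Type} (l : List α) : List (α × α) := l.zip l.tail

lemma adj_cons₂ {α : Type} (a b : α) (l : List α) : adj (a :: b :: l) = (a, b) :: adj (b :: l) := rfl

lemma adj_append {α : Type} (u v : List α) (hu : u ≠ []) (hv : v ≠ []) :
    adj (u ++ v) = adj u ++ (u.getLast hu, v.head hv) :: adj v := by
  induction u with
  | nil => exact absurd rfl hu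
  | cons x u' ih =>
    cases u' with
    | nil =>
      cases v with
      | nil => exact absurd rfl hv
      | cons h t => simp [adj_cons₂, adj]
    | cons y u'' =>
      have h1 : (x :: y :: u'') ++ v = x :: ((y :: u'') ++ v) := rfl
      rw [h1]
      have h2 : (y :: u'') ++ v = y :: (u'' ++ v) := rfl
      have h3 : adj (x :: ((y :: u'') ++ v)) = (x, y) :: adj ((y :: u'') ++ v) := by
        rw [h2]; exact adj_cons₂ x y (u'' ++ v)
      rw [h3, ih (List.cons_ne_nil y u'')]
      simp [adj_cons₂, List.getLast_cons]

lemma adj_map_range_asc {α : Type} (f : Int → α) (s t : Int) :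
    adj ((PySem.List.pyRange s t 1).map f) = (PySem.List.pyRange s (t - 1) 1).map (fun i => (f i, f (i + 1))) := by
  suffices h : ∀ (n : Nat) (s : Int), (t - s).toNat = n →
      adj ((PySem.List.pyRange s t 1).map f) = (PySem.List.pyRange s (t - 1) 1).map (fun i => (f i, f (i + 1))) by
    exact h (t - s).toNat s rfl
  intro n
  induction n with
  | zero =>
    intro s hn
    have hts : t ≤ s := by omega
    rw [PySem.List.pyRange_one_eq_nil hts, PySem.List.pyRange_one_eq_nil (by omega)]
    rfl
  | succ n ih =>
    intro s hn
    have hst : s < t := by omega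
    by_cases h1 : t = s + 1
    · subst h1
      rw [PySem.List.pyRange_one_cons hst, PySem.List.pyRange_one_eq_nil (by omega),
        PySem.List.pyRange_one_eq_nil (by omega)]
      rfl
    · have hst1 : s + 1 < t := by omega
      rw [PySem.List.pyRange_one_cons hst, PySem.List.pyRange_one_cons hst1]
      have hmap : (s :: (s + 1) :: PySem.List.pyRange (s + 1 + 1) t 1).map f =
          f s :: f (s + 1) :: (PySem.List.pyRange (s + 1 + 1) t 1).map f := rfl
      rw [hmap, adj_cons₂]
      have hback : f (s + 1) :: (PySem.List.pyRange (s + 1 + 1) t 1).map f =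
          ((PySem.List.pyRange (s + 1) t 1).map f) := by
        rw [PySem.List.pyRange_one_cons hst1]; rfl
      rw [hback, ih (s + 1) (by omega)]
      rw [PySem.List.pyRange_one_cons (show s < t - 1 by omega)]
      rfl

lemma adj_map_range_desc {α : Type} (f : Int → α) (s t : Int) :
    adj ((PySem.List.pyRange t s (-1)).map f) = (PySem.List.pyRange t (s + 1) (-1)).map (fun i => (f i, f (i - 1))) := by
  suffices h : ∀ (n : Nat) (t : Int), (t - s).toNat = n →
      adj ((PySem.List.pyRange t s (-1)).map f) = (PySem.List.pyRange t (s + 1) (-1)).map (fun i => (f i, f (i - 1))) by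
    exact h (t - s).toNat t rfl
  intro n
  induction n with
  | zero =>
    intro t hn
    have hts : t ≤ s := by omega
    rw [PySem.List.pyRange_neg_one_eq_nil hts, PySem.List.pyRange_neg_one_eq_nil (by omega)]
    rfl
  | succ n ih =>
    intro t hn
    have hst : s < t := by omega
    by_cases h1 : t = s + 1
    · subst h1
      rw [PySem.List.pyRange_neg_one_cons hst, PySem.List.pyRange_neg_one_eq_nil (by omega),
        PySem.List.pyRange_neg_one_eq_nil (by omega)]
      rfl
    · have hst1 : s < t - 1 := by omega
      rw [PySem.List.pyRange_neg_one_cons hst, PySem.List.pyRange_neg_one_cons hst1]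
      have hmap : (t :: (t - 1) :: PySem.List.pyRange (t - 1 - 1) s (-1)).map f =
          f t :: f (t - 1) :: (PySem.List.pyRange (t - 1 - 1) s (-1)).map f := rfl
      rw [hmap, adj_cons₂]
      have hback : f (t - 1) :: (PySem.List.pyRange (t - 1 - 1) s (-1)).map f =
          ((PySem.List.pyRange (t - 1) s (-1)).map f) := by
        rw [PySem.List.pyRange_neg_one_cons hst1]; rfl
      rw [hback, ih (t - 1) (by omega)]
      rw [PySem.List.pyRange_neg_one_cons (show s + 1 < t by omega)]
      rfl

lemma zip_tail_dropLast {α β : Type} (f : α → β) (ks : List α) :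
    ks.tail.zip ((ks.map f).dropLast) = (adj ks).map (fun pq => (pq.2, f pq.1)) := by
  induction ks with
  | nil => rfl
  | cons x t ih =>
    cases t with
    | nil => rfl
    | cons y u =>
      have h1 : ((x :: y :: u).map f).dropLast = f x :: ((y :: u).map f).dropLast := by
        simp
      rw [List.tail_cons, h1]
      have h2 : (y :: u).zip (f x :: ((y :: u).map f).dropLast) =
          (y, f x) :: u.zip (((y :: u).map f).dropLast) := rfl
      rw [h2, adj_cons₂]
      simp only [List.map_cons]
      have ih' : u.zip ((f y :: List.map f u).dropLast) = List.map (fun pq => (pq.2, f pq.1)) (adj (y :: u)) := by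
        simpa using ih
      rw [ih']

-- ---- the per-query write lists ----

-- the border cells, clockwise from the top-left corner (0-based)
def keys0 (a b c d : Int) : List (Int × Int) :=
  ((PySem.List.pyRange b d 1).map (fun j => (a, j))) ++
  ((PySem.List.pyRange a c 1).map (fun i => (i, d))) ++
  ((PySem.List.pyRange d b (-1)).map (fun j => (c, j))) ++
  ((PySem.List.pyRange c a (-1)).map (fun i => (i, b)))

-- A writes the values list rotated one step clockwise
def pairsA (bd : List (List Int)) (a b c d : Int) : List ((Int × Int) × Int) :=
  (keys0 a b c d).zip
    ([cellGet bd (a + 1) b] ++ ((keys0 a b c d).map (fun p => cellGet bd p.1 p.2)).dropLast)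

-- B's writes: left column up, bottom row left, right column down, top row right, corner
def pairsB (bd : List (List Int)) (a b c d : Int) : List ((Int × Int) × Int) :=
  ((PySem.List.pyRange a c 1).map (fun i => ((i, b), cellGet bd (i + 1) b))) ++
  ((PySem.List.pyRange b d 1).map (fun j => ((c, j), cellGet bd c (j + 1)))) ++
  ((PySem.List.pyRange c a (-1)).map (fun i => ((i, d), cellGet bd (i - 1) d))) ++
  ((PySem.List.pyRange d (b + 1) (-1)).map (fun j => ((a, j), cellGet bd a (j - 1)))) ++
  [((a, b + 1), cellGet bd a b)]

-- what both write: each border cell receives its clockwise predecessor's old value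
def targetF (bd : List (List Int)) (a b c d : Int) (p : Int × Int) : Option Int :=
  if p.1 = a ∧ b < p.2 ∧ p.2 ≤ d then some (cellGet bd a (p.2 - 1))
  else if p.2 = d ∧ a < p.1 ∧ p.1 ≤ c then some (cellGet bd (p.1 - 1) d)
  else if p.1 = c ∧ b ≤ p.2 ∧ p.2 < d then some (cellGet bd c (p.2 + 1))
  else if p.2 = b ∧ a ≤ p.1 ∧ p.1 < c then some (cellGet bd (p.1 + 1) b)
  else none

-- the minimum of the border's old values (in A's clockwise order)
def qmin (bd : List (List Int)) (a b c d : Int) : Int :=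
  (PySem.List.min? ((keys0 a b c d).map (fun p => cellGet bd p.1 p.2)) (fun v => v)).getD 0

lemma getLast_of_getLast? {α : Type} (l : List α) (h : l ≠ []) (x : α) (hx : l.getLast? = some x) :
    l.getLast h = x := by
  rw [List.getLast?_eq_some_getLast h] at hx
  exact (Option.some.inj hx)

lemma head_of_head? {α : Type} (l : List α) (h : l ≠ []) (x : α) (hx : l.head? = some x) :
    l.head h = x := by
  rw [List.head?_eq_some_head h] at hx
  exact (Option.some.inj hx)

lemma pairsA_eq {bd : List (List Int)} {a b c d : Int} (hac : a < c) (hbd : b < d) :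
    pairsA bd a b c d =
      ((a, b), cellGet bd (a + 1) b) ::
      ((PySem.List.pyRange (b + 1) d 1).map (fun j => ((a, j), cellGet bd a (j - 1))) ++
       (((a, d), cellGet bd a (d - 1)) ::
        ((PySem.List.pyRange (a + 1) c 1).map (fun i => ((i, d), cellGet bd (i - 1) d)) ++
         (((c, d), cellGet bd (c - 1) d) ::
          ((PySem.List.pyRange (d - 1) b (-1)).map (fun j => ((c, j), cellGet bd c (j + 1))) ++
           (((c, b), cellGet bd c (b + 1)) ::
            (PySem.List.pyRange (c - 1) a (-1)).map (fun i => ((i, b), cellGet bd (i + 1) b)))))))) := by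
  have hT : (PySem.List.pyRange b d 1).map (fun j => ((a : Int), j)) =
      ((a, b) : Int × Int) :: (PySem.List.pyRange (b + 1) d 1).map (fun j => ((a : Int), j)) := by
    rw [PySem.List.pyRange_one_cons hbd]; rfl
  have hR : (PySem.List.pyRange a c 1).map (fun i => (i, (d : Int))) =
      ((a, d) : Int × Int) :: (PySem.List.pyRange (a + 1) c 1).map (fun i => (i, (d : Int))) := by
    rw [PySem.List.pyRange_one_cons hac]; rfl
  have hB : (PySem.List.pyRange d b (-1)).map (fun j => ((c : Int), j)) =
      ((c, d) : Int × Int) :: (PySem.List.pyRange (d - 1) b (-1)).map (fun j => ((c : Int), j)) := by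
    rw [PySem.List.pyRange_neg_one_cons hbd]; rfl
  have hL : (PySem.List.pyRange c a (-1)).map (fun i => (i, (b : Int))) =
      ((c, b) : Int × Int) :: (PySem.List.pyRange (c - 1) a (-1)).map (fun i => (i, (b : Int))) := by
    rw [PySem.List.pyRange_neg_one_cons hac]; rfl
  have hTne : (PySem.List.pyRange b d 1).map (fun j => ((a : Int), j)) ≠ [] := by rw [hT]; simp
  have hRne : (PySem.List.pyRange a c 1).map (fun i => (i, (d : Int))) ≠ [] := by rw [hR]; simp
  have hBne : (PySem.List.pyRange d b (-1)).map (fun j => ((c : Int), j)) ≠ [] := by rw [hB]; simp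
  have hLne : (PySem.List.pyRange c a (-1)).map (fun i => (i, (b : Int))) ≠ [] := by rw [hL]; simp
  -- getLast? of each segment
  have hTlast : ((PySem.List.pyRange b d 1).map (fun j => ((a : Int), j))).getLast? = some (a, d - 1) := by
    have : PySem.List.pyRange b d 1 = PySem.List.pyRange b (d - 1) 1 ++ [d - 1] := by
      have h1 : d = (d - 1) + 1 := by ring
      rw [h1, PySem.List.pyRange_one_succ_right (by omega)]
      congr 1 <;> ring_nf
    rw [this, List.map_append]
    exact List.getLast?_concat
  have hRlast : ((PySem.List.pyRange a c 1).map (fun i => (i, (d : Int)))).getLast? = some (c - 1, d) := by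
    have : PySem.List.pyRange a c 1 = PySem.List.pyRange a (c - 1) 1 ++ [c - 1] := by
      have h1 : c = (c - 1) + 1 := by ring
      rw [h1, PySem.List.pyRange_one_succ_right (by omega)]
      congr 1 <;> ring_nf
    rw [this, List.map_append]
    exact List.getLast?_concat
  have hBlast : ((PySem.List.pyRange d b (-1)).map (fun j => ((c : Int), j))).getLast? = some (c, b + 1) := by
    rw [PySem.List.pyRange_neg_one_eq_reverse, List.map_reverse, List.getLast?_reverse, List.head?_map,
      PySem.List.pyRange_one_cons (by omega : b + 1 < d + 1)]
    rfl
  have hLlast : ((PySem.List.pyRange c a (-1)).map (fun i => (i, (b : Int)))).getLast? = some (a + 1, b) := by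
    rw [PySem.List.pyRange_neg_one_eq_reverse, List.map_reverse, List.getLast?_reverse, List.head?_map,
      PySem.List.pyRange_one_cons (by omega : a + 1 < c + 1)]
    rfl
  -- adjacency of keys0
  have e1 : adj ((PySem.List.pyRange d b (-1)).map (fun j => ((c : Int), j)) ++
      (PySem.List.pyRange c a (-1)).map (fun i => (i, (b : Int)))) =
      adj ((PySem.List.pyRange d b (-1)).map (fun j => ((c : Int), j))) ++
        (((c, b + 1), (c, b)) : (Int × Int) × (Int × Int)) ::
        adj ((PySem.List.pyRange c a (-1)).map (fun i => (i, (b : Int)))) := by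
    rw [adj_append _ _ hBne hLne]
    rw [getLast_of_getLast? _ hBne _ hBlast, head_of_head? _ hLne (c, b) (by rw [hL]; rfl)]
  have e2 : adj ((PySem.List.pyRange a c 1).map (fun i => (i, (d : Int))) ++
      ((PySem.List.pyRange d b (-1)).map (fun j => ((c : Int), j)) ++
       (PySem.List.pyRange c a (-1)).map (fun i => (i, (b : Int))))) =
      adj ((PySem.List.pyRange a c 1).map (fun i => (i, (d : Int)))) ++
        (((c - 1, d), (c, d)) : (Int × Int) × (Int × Int)) ::
        (adj ((PySem.List.pyRange d b (-1)).map (fun j => ((c : Int), j))) ++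
          (((c, b + 1), (c, b)) : (Int × Int) × (Int × Int)) ::
          adj ((PySem.List.pyRange c a (-1)).map (fun i => (i, (b : Int))))) := by
    have hne : ((PySem.List.pyRange d b (-1)).map (fun j => ((c : Int), j)) ++
        (PySem.List.pyRange c a (-1)).map (fun i => (i, (b : Int)))) ≠ [] := by
      simp only [ne_eq, List.append_eq_nil_iff, not_and]
      intro h; exact absurd h hBne
    rw [adj_append _ _ hRne hne, e1]
    rw [getLast_of_getLast? _ hRne _ hRlast]
    rw [head_of_head? _ hne ((c, d) : Int × Int) (by rw [hB]; rfl)]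
  have e3 : adj (keys0 a b c d) =
      adj ((PySem.List.pyRange b d 1).map (fun j => ((a : Int), j))) ++
        (((a, d - 1), (a, d)) : (Int × Int) × (Int × Int)) ::
        (adj ((PySem.List.pyRange a c 1).map (fun i => (i, (d : Int)))) ++
          (((c - 1, d), (c, d)) : (Int × Int) × (Int × Int)) ::
          (adj ((PySem.List.pyRange d b (-1)).map (fun j => ((c : Int), j))) ++
            (((c, b + 1), (c, b)) : (Int × Int) × (Int × Int)) ::
            adj ((PySem.List.pyRange c a (-1)).map (fun i => (i, (b : Int)))))) := by
    unfold keys0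
    have hne : ((PySem.List.pyRange a c 1).map (fun i => (i, (d : Int))) ++
        ((PySem.List.pyRange d b (-1)).map (fun j => ((c : Int), j)) ++
         (PySem.List.pyRange c a (-1)).map (fun i => (i, (b : Int))))) ≠ [] := by
      simp only [ne_eq, List.append_eq_nil_iff, not_and]
      intro h; exact absurd h hRne
    rw [List.append_assoc, List.append_assoc, adj_append _ _ hTne hne, e2]
    rw [getLast_of_getLast? _ hTne _ hTlast]
    rw [head_of_head? _ hne ((a, d) : Int × Int) (by rw [hR]; rfl)]
  -- the four adjacency segments, mapped and reindexed
  have m1 : (adj ((PySem.List.pyRange b d 1).map (fun j => ((a : Int), j)))).map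
        (fun pq => (pq.2, cellGet bd pq.1.1 pq.1.2)) =
      (PySem.List.pyRange (b + 1) d 1).map (fun j => ((a, j), cellGet bd a (j - 1))) := by
    rw [adj_map_range_asc, List.map_map]
    conv_rhs => rw [show (d : Int) = d - 1 + 1 from by ring]
    rw [← rngMapShift b (d - 1) 1 (fun j => (((a : Int), j), cellGet bd a (j - 1)))]
    apply List.map_congr_left
    intro x _
    simp only [Function.comp_apply]
    norm_num
  have m2 : (adj ((PySem.List.pyRange a c 1).map (fun i => (i, (d : Int))))).map
        (fun pq => (pq.2, cellGet bd pq.1.1 pq.1.2)) =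
      (PySem.List.pyRange (a + 1) c 1).map (fun i => ((i, d), cellGet bd (i - 1) d)) := by
    rw [adj_map_range_asc, List.map_map]
    conv_rhs => rw [show (c : Int) = c - 1 + 1 from by ring]
    rw [← rngMapShift a (c - 1) 1 (fun i => ((i, (d : Int)), cellGet bd (i - 1) d))]
    apply List.map_congr_left
    intro x _
    simp only [Function.comp_apply]
    norm_num
  have m3 : (adj ((PySem.List.pyRange d b (-1)).map (fun j => ((c : Int), j)))).map
        (fun pq => (pq.2, cellGet bd pq.1.1 pq.1.2)) =
      (PySem.List.pyRange (d - 1) b (-1)).map (fun j => ((c, j), cellGet bd c (j + 1))) := by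
    rw [adj_map_range_desc, List.map_map]
    conv_rhs => rw [show d - 1 = d + (-1) from by ring, show (b : Int) = b + 1 + (-1) from by ring]
    rw [← rngMapShiftNeg d (b + 1) (-1) (fun j => (((c : Int), j), cellGet bd c (j + 1)))]
    apply List.map_congr_left
    intro x _
    simp only [Function.comp_apply]
    norm_num
    ring
  have m4 : (adj ((PySem.List.pyRange c a (-1)).map (fun i => (i, (b : Int))))).map
        (fun pq => (pq.2, cellGet bd pq.1.1 pq.1.2)) =
      (PySem.List.pyRange (c - 1) a (-1)).map (fun i => ((i, b), cellGet bd (i + 1) b)) := by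
    rw [adj_map_range_desc, List.map_map]
    conv_rhs => rw [show c - 1 = c + (-1) from by ring, show (a : Int) = a + 1 + (-1) from by ring]
    rw [← rngMapShiftNeg c (a + 1) (-1) (fun i => ((i, (b : Int)), cellGet bd (i + 1) b))]
    apply List.map_congr_left
    intro x _
    simp only [Function.comp_apply]
    norm_num
    ring
  -- assemble
  have hk0 : keys0 a b c d = (a, b) ::
      ((PySem.List.pyRange (b + 1) d 1).map (fun j => ((a : Int), j)) ++
       ((PySem.List.pyRange a c 1).map (fun i => (i, (d : Int))) ++
        ((PySem.List.pyRange d b (-1)).map (fun j => ((c : Int), j)) ++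
         (PySem.List.pyRange c a (-1)).map (fun i => (i, (b : Int)))))) := by
    unfold keys0
    rw [List.append_assoc, List.append_assoc, hT]
    rfl
  have hmapne : ((keys0 a b c d).map (fun p => cellGet bd p.1 p.2)) ≠ [] := by
    rw [hk0]; simp
  unfold pairsA
  rw [List.singleton_append]
  have hzip : keys0 a b c d = (a, b) :: (keys0 a b c d).tail := by
    rw [hk0]; rfl
  conv_lhs => rw [hzip]
  rw [List.zip_cons_cons]
  rw [← hzip]
  rw [zip_tail_dropLast (fun p => cellGet bd p.1 p.2) (keys0 a b c d)]
  congr 1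
  rw [e3]
  rw [List.map_append, List.map_cons, List.map_append, List.map_cons, List.map_append, List.map_cons]
  rw [m1, m2, m3, m4]

-- development of lookup_pairsB
lemma lookup_pairsB {bd : List (List Int)} {a b c d : Int} (hac : a < c) (hbd : b < d) (p : Int × Int) :
    List.lookup p (pairsB bd a b c d) = targetF bd a b c d p := by
  obtain ⟨i, j⟩ := p
  unfold pairsB targetF
  simp only [List.lookup_append]
  by_cases c1 : i = a ∧ b < j ∧ j ≤ d
  · obtain ⟨hi, hj1, hj2⟩ := c1
    rw [hi]
    rw [if_pos ⟨rfl, hj1, hj2⟩]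
    have h1 : List.lookup ((a : Int), j) ((PySem.List.pyRange a c 1).map (fun i => ((i, b), cellGet bd (i + 1) b))) = none :=
      lookup_map_not_mem _ _ _ _ (by
        intro x hx h; rw [Prod.mk.injEq] at h; rw [PySem.List.mem_pyRange_one] at hx; omega)
    have h2 : List.lookup ((a : Int), j) ((PySem.List.pyRange b d 1).map (fun j => ((c, j), cellGet bd c (j + 1)))) = none :=
      lookup_map_not_mem _ _ _ _ (by
        intro x hx h; rw [Prod.mk.injEq] at h; rw [PySem.List.mem_pyRange_one] at hx; omega)
    have h3 : List.lookup ((a : Int), j) ((PySem.List.pyRange c a (-1)).map (fun i => ((i, d), cellGet bd (i - 1) d))) = none :=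
      lookup_map_not_mem _ _ _ _ (by
        intro x hx h; rw [Prod.mk.injEq] at h; rw [PySem.List.mem_pyRange_neg_one] at hx; omega)
    rw [h1, h2, h3]
    by_cases hj3 : b + 1 < j
    · have h4 : List.lookup ((a : Int), j) ((PySem.List.pyRange d (b + 1) (-1)).map (fun j => ((a, j), cellGet bd a (j - 1)))) = some (cellGet bd a (j - 1)) :=
        lookup_map_inj (fun x => (a, x)) (fun x => cellGet bd a (x - 1)) _ j
          (by intro x y h; rw [Prod.mk.injEq] at h; exact h.2)
          (by rw [PySem.List.mem_pyRange_neg_one]; omega)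
      rw [h4]; rfl
    · have hjb : j = b + 1 := by omega
      subst hjb
      have h4 : List.lookup ((a : Int), b + 1) ((PySem.List.pyRange d (b + 1) (-1)).map (fun j => ((a, j), cellGet bd a (j - 1)))) = none :=
        lookup_map_not_mem _ _ _ _ (by
          intro x hx h; rw [Prod.mk.injEq] at h; rw [PySem.List.mem_pyRange_neg_one] at hx; omega)
      rw [h4]
      have : ((a : Int), b + 1) = ((a : Int), b + 1) := rfl
      rw [List.lookup_cons_self]
      simp
  · by_cases c2 : j = d ∧ a < i ∧ i ≤ c
    · obtain ⟨hj, hi1, hi2⟩ := c2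
      rw [if_neg c1]
      rw [hj]
      rw [if_pos ⟨rfl, hi1, hi2⟩]
      have h1 : List.lookup (i, (d : Int)) ((PySem.List.pyRange a c 1).map (fun i => ((i, b), cellGet bd (i + 1) b))) = none :=
        lookup_map_not_mem _ _ _ _ (by
          intro x hx h; rw [Prod.mk.injEq] at h; rw [PySem.List.mem_pyRange_one] at hx; omega)
      have h2 : List.lookup (i, (d : Int)) ((PySem.List.pyRange b d 1).map (fun j => ((c, j), cellGet bd c (j + 1)))) = none :=
        lookup_map_not_mem _ _ _ _ (by
          intro x hx h; rw [Prod.mk.injEq] at h; rw [PySem.List.mem_pyRange_one] at hx; omega)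
      have h3 : List.lookup (i, (d : Int)) ((PySem.List.pyRange c a (-1)).map (fun i => ((i, d), cellGet bd (i - 1) d))) = some (cellGet bd (i - 1) d) :=
        lookup_map_inj (fun x => (x, d)) (fun x => cellGet bd (x - 1) d) _ i
          (by intro x y h; rw [Prod.mk.injEq] at h; exact h.1)
          (by rw [PySem.List.mem_pyRange_neg_one]; omega)
      rw [h1, h2, h3]; rfl
    · by_cases c3 : i = c ∧ b ≤ j ∧ j < d
      · obtain ⟨hi, hj1, hj2⟩ := c3
        rw [if_neg c1, if_neg c2]
        rw [hi]
        rw [if_pos ⟨rfl, hj1, hj2⟩]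
        have h1 : List.lookup ((c : Int), j) ((PySem.List.pyRange a c 1).map (fun i => ((i, b), cellGet bd (i + 1) b))) = none :=
          lookup_map_not_mem _ _ _ _ (by
            intro x hx h; rw [Prod.mk.injEq] at h; rw [PySem.List.mem_pyRange_one] at hx; omega)
        have h2 : List.lookup ((c : Int), j) ((PySem.List.pyRange b d 1).map (fun j => ((c, j), cellGet bd c (j + 1)))) = some (cellGet bd c (j + 1)) :=
          lookup_map_inj (fun x => (c, x)) (fun x => cellGet bd c (x + 1)) _ j
            (by intro x y h; rw [Prod.mk.injEq] at h; exact h.2)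
            (by rw [PySem.List.mem_pyRange_one]; omega)
        rw [h1, h2]; rfl
      · by_cases c4 : j = b ∧ a ≤ i ∧ i < c
        · obtain ⟨hj, hi1, hi2⟩ := c4
          rw [if_neg c1, if_neg c2, if_neg c3]
          rw [hj]
          rw [if_pos ⟨rfl, hi1, hi2⟩]
          have h1 : List.lookup (i, (b : Int)) ((PySem.List.pyRange a c 1).map (fun i => ((i, b), cellGet bd (i + 1) b))) = some (cellGet bd (i + 1) b) :=
            lookup_map_inj (fun x => (x, b)) (fun x => cellGet bd (x + 1) b) _ i
              (by intro x y h; rw [Prod.mk.injEq] at h; exact h.1)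
              (by rw [PySem.List.mem_pyRange_one]; omega)
          rw [h1]; rfl
        · rw [if_neg c1, if_neg c2, if_neg c3, if_neg c4]
          have h1 : List.lookup (i, j) ((PySem.List.pyRange a c 1).map (fun i => ((i, b), cellGet bd (i + 1) b))) = none :=
            lookup_map_not_mem _ _ _ _ (by
              intro x hx h; rw [Prod.mk.injEq] at h; rw [PySem.List.mem_pyRange_one] at hx
              exact c4 ⟨h.2.symm, by omega, by omega⟩)
          have h2 : List.lookup (i, j) ((PySem.List.pyRange b d 1).map (fun j => ((c, j), cellGet bd c (j + 1)))) = none :=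
            lookup_map_not_mem _ _ _ _ (by
              intro x hx h; rw [Prod.mk.injEq] at h; rw [PySem.List.mem_pyRange_one] at hx
              exact c3 ⟨h.1.symm, by omega, by omega⟩)
          have h3 : List.lookup (i, j) ((PySem.List.pyRange c a (-1)).map (fun i => ((i, d), cellGet bd (i - 1) d))) = none :=
            lookup_map_not_mem _ _ _ _ (by
              intro x hx h; rw [Prod.mk.injEq] at h; rw [PySem.List.mem_pyRange_neg_one] at hx
              exact c2 ⟨h.2.symm, by omega, by omega⟩)
          have h4 : List.lookup (i, j) ((PySem.List.pyRange d (b + 1) (-1)).map (fun j => ((a, j), cellGet bd a (j - 1)))) = none :=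
            lookup_map_not_mem _ _ _ _ (by
              intro x hx h; rw [Prod.mk.injEq] at h; rw [PySem.List.mem_pyRange_neg_one] at hx
              exact c1 ⟨h.1.symm, by omega, by omega⟩)
          have h5 : List.lookup (i, j) [(((a : Int), b + 1), cellGet bd a b)] = none := by
            have hne : (i, j) ≠ ((a : Int), b + 1) := by
              intro h; rw [Prod.mk.injEq] at h
              exact c1 ⟨h.1, by omega, by omega⟩
            rw [lookup_cons_ne hne]; rfl
          rw [h1, h2, h3, h4, h5]
          rfl

lemma lookup_pairsA {bd : List (List Int)} {a b c d : Int} (hac : a < c) (hbd : b < d) (p : Int × Int) :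
    List.lookup p (pairsA bd a b c d) = targetF bd a b c d p := by
  obtain ⟨i, j⟩ := p
  rw [pairsA_eq hac hbd]
  unfold targetF
  simp only [List.lookup_append]
  by_cases c1 : i = a ∧ b < j ∧ j ≤ d
  · obtain ⟨hi, hj1, hj2⟩ := c1
    rw [hi]
    rw [if_pos ⟨rfl, hj1, hj2⟩]
    rw [lookup_cons_ne (by intro h; rw [Prod.mk.injEq] at h; omega : ((a : Int), j) ≠ (a, b))]
    simp only [List.lookup_append]
    by_cases hjd : j = d
    · have h1 : List.lookup ((a : Int), j) ((PySem.List.pyRange (b + 1) d 1).map (fun j => ((a, j), cellGet bd a (j - 1)))) = none :=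
        lookup_map_not_mem _ _ _ _ (by
          intro x hx h; rw [Prod.mk.injEq] at h; rw [PySem.List.mem_pyRange_one] at hx; omega)
      rw [h1, hjd, List.lookup_cons_self]
      simp
    · have h1 : List.lookup ((a : Int), j) ((PySem.List.pyRange (b + 1) d 1).map (fun j => ((a, j), cellGet bd a (j - 1)))) = some (cellGet bd a (j - 1)) :=
        lookup_map_inj (fun x => (a, x)) (fun x => cellGet bd a (x - 1)) _ j
          (by intro x y h; rw [Prod.mk.injEq] at h; exact h.2)
          (by rw [PySem.List.mem_pyRange_one]; omega)
      rw [h1]; rfl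
  · by_cases c2 : j = d ∧ a < i ∧ i ≤ c
    · obtain ⟨hj, hi1, hi2⟩ := c2
      rw [if_neg c1]
      rw [hj]
      rw [if_pos ⟨rfl, hi1, hi2⟩]
      rw [lookup_cons_ne (by intro h; rw [Prod.mk.injEq] at h; omega : (i, (d : Int)) ≠ (a, b))]
      simp only [List.lookup_append]
      have h1 : List.lookup (i, (d : Int)) ((PySem.List.pyRange (b + 1) d 1).map (fun j => ((a, j), cellGet bd a (j - 1)))) = none :=
        lookup_map_not_mem _ _ _ _ (by
          intro x hx h; rw [Prod.mk.injEq] at h; rw [PySem.List.mem_pyRange_one] at hx; omega)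
      rw [h1]
      rw [lookup_cons_ne (by intro h; rw [Prod.mk.injEq] at h; omega : (i, (d : Int)) ≠ (a, d))]
      simp only [List.lookup_append]
      by_cases hic : i = c
      · have h2 : List.lookup (i, (d : Int)) ((PySem.List.pyRange (a + 1) c 1).map (fun i => ((i, d), cellGet bd (i - 1) d))) = none :=
          lookup_map_not_mem _ _ _ _ (by
            intro x hx h; rw [Prod.mk.injEq] at h; rw [PySem.List.mem_pyRange_one] at hx; omega)
        rw [h2, hic, List.lookup_cons_self]
        simp
      · have h2 : List.lookup (i, (d : Int)) ((PySem.List.pyRange (a + 1) c 1).map (fun i => ((i, d), cellGet bd (i - 1) d))) = some (cellGet bd (i - 1) d) :=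
          lookup_map_inj (fun x => (x, d)) (fun x => cellGet bd (x - 1) d) _ i
            (by intro x y h; rw [Prod.mk.injEq] at h; exact h.1)
            (by rw [PySem.List.mem_pyRange_one]; omega)
        rw [h2]; rfl
    · by_cases c3 : i = c ∧ b ≤ j ∧ j < d
      · obtain ⟨hi, hj1, hj2⟩ := c3
        rw [if_neg c1, if_neg c2]
        rw [hi]
        rw [if_pos ⟨rfl, hj1, hj2⟩]
        rw [lookup_cons_ne (by intro h; rw [Prod.mk.injEq] at h; omega : ((c : Int), j) ≠ (a, b))]
        simp only [List.lookup_append]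
        have h1 : List.lookup ((c : Int), j) ((PySem.List.pyRange (b + 1) d 1).map (fun j => ((a, j), cellGet bd a (j - 1)))) = none :=
          lookup_map_not_mem _ _ _ _ (by
            intro x hx h; rw [Prod.mk.injEq] at h; rw [PySem.List.mem_pyRange_one] at hx; omega)
        rw [h1]
        rw [lookup_cons_ne (by intro h; rw [Prod.mk.injEq] at h; omega : ((c : Int), j) ≠ (a, d))]
        simp only [List.lookup_append]
        have h2 : List.lookup ((c : Int), j) ((PySem.List.pyRange (a + 1) c 1).map (fun i => ((i, d), cellGet bd (i - 1) d))) = none :=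
          lookup_map_not_mem _ _ _ _ (by
            intro x hx h; rw [Prod.mk.injEq] at h; rw [PySem.List.mem_pyRange_one] at hx; omega)
        rw [h2]
        rw [lookup_cons_ne (by intro h; rw [Prod.mk.injEq] at h; omega : ((c : Int), j) ≠ (c, d))]
        simp only [List.lookup_append]
        by_cases hjb : j = b
        · have h3 : List.lookup ((c : Int), j) ((PySem.List.pyRange (d - 1) b (-1)).map (fun j => ((c, j), cellGet bd c (j + 1)))) = none :=
            lookup_map_not_mem _ _ _ _ (by
              intro x hx h; rw [Prod.mk.injEq] at h; rw [PySem.List.mem_pyRange_neg_one] at hx; omega)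
          rw [h3, hjb, List.lookup_cons_self]
          simp
        · have h3 : List.lookup ((c : Int), j) ((PySem.List.pyRange (d - 1) b (-1)).map (fun j => ((c, j), cellGet bd c (j + 1)))) = some (cellGet bd c (j + 1)) :=
            lookup_map_inj (fun x => (c, x)) (fun x => cellGet bd c (x + 1)) _ j
              (by intro x y h; rw [Prod.mk.injEq] at h; exact h.2)
              (by rw [PySem.List.mem_pyRange_neg_one]; omega)
          rw [h3]; rfl
      · by_cases c4 : j = b ∧ a ≤ i ∧ i < c
        · obtain ⟨hj, hi1, hi2⟩ := c4
          rw [if_neg c1, if_neg c2, if_neg c3]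
          rw [hj]
          rw [if_pos ⟨rfl, hi1, hi2⟩]
          by_cases hia : i = a
          · rw [hia, List.lookup_cons_self]
          · rw [lookup_cons_ne (by intro h; rw [Prod.mk.injEq] at h; omega : (i, (b : Int)) ≠ (a, b))]
            simp only [List.lookup_append]
            have h1 : List.lookup (i, (b : Int)) ((PySem.List.pyRange (b + 1) d 1).map (fun j => ((a, j), cellGet bd a (j - 1)))) = none :=
              lookup_map_not_mem _ _ _ _ (by
                intro x hx h; rw [Prod.mk.injEq] at h; rw [PySem.List.mem_pyRange_one] at hx; omega)
            rw [h1]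
            rw [lookup_cons_ne (by intro h; rw [Prod.mk.injEq] at h; omega : (i, (b : Int)) ≠ (a, d))]
            simp only [List.lookup_append]
            have h2 : List.lookup (i, (b : Int)) ((PySem.List.pyRange (a + 1) c 1).map (fun i => ((i, d), cellGet bd (i - 1) d))) = none :=
              lookup_map_not_mem _ _ _ _ (by
                intro x hx h; rw [Prod.mk.injEq] at h; rw [PySem.List.mem_pyRange_one] at hx; omega)
            rw [h2]
            rw [lookup_cons_ne (by intro h; rw [Prod.mk.injEq] at h; omega : (i, (b : Int)) ≠ (c, d))]
            simp only [List.lookup_append]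
            have h3 : List.lookup (i, (b : Int)) ((PySem.List.pyRange (d - 1) b (-1)).map (fun j => ((c, j), cellGet bd c (j + 1)))) = none :=
              lookup_map_not_mem _ _ _ _ (by
                intro x hx h; rw [Prod.mk.injEq] at h; rw [PySem.List.mem_pyRange_neg_one] at hx; omega)
            rw [h3]
            rw [lookup_cons_ne (by intro h; rw [Prod.mk.injEq] at h; omega : (i, (b : Int)) ≠ (c, b))]
            have h4 : List.lookup (i, (b : Int)) ((PySem.List.pyRange (c - 1) a (-1)).map (fun i => ((i, b), cellGet bd (i + 1) b))) = some (cellGet bd (i + 1) b) :=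
              lookup_map_inj (fun x => (x, b)) (fun x => cellGet bd (x + 1) b) _ i
                (by intro x y h; rw [Prod.mk.injEq] at h; exact h.1)
                (by rw [PySem.List.mem_pyRange_neg_one]; omega)
            rw [h4]; rfl
        · rw [if_neg c1, if_neg c2, if_neg c3, if_neg c4]
          rw [lookup_cons_ne (by intro h; rw [Prod.mk.injEq] at h; exact c4 ⟨h.2, by omega, by omega⟩ : ((i : Int), j) ≠ (a, b))]
          simp only [List.lookup_append]
          have h1 : List.lookup (i, j) ((PySem.List.pyRange (b + 1) d 1).map (fun j => ((a, j), cellGet bd a (j - 1)))) = none :=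
            lookup_map_not_mem _ _ _ _ (by
              intro x hx h; rw [Prod.mk.injEq] at h; rw [PySem.List.mem_pyRange_one] at hx
              exact c1 ⟨h.1.symm, by omega, by omega⟩)
          rw [h1]
          rw [lookup_cons_ne (by intro h; rw [Prod.mk.injEq] at h; exact c1 ⟨h.1, by omega, by omega⟩ : ((i : Int), j) ≠ (a, d))]
          simp only [List.lookup_append]
          have h2 : List.lookup (i, j) ((PySem.List.pyRange (a + 1) c 1).map (fun i => ((i, d), cellGet bd (i - 1) d))) = none :=
            lookup_map_not_mem _ _ _ _ (by
              intro x hx h; rw [Prod.mk.injEq] at h; rw [PySem.List.mem_pyRange_one] at hx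
              exact c2 ⟨h.2.symm, by omega, by omega⟩)
          rw [h2]
          rw [lookup_cons_ne (by intro h; rw [Prod.mk.injEq] at h; exact c2 ⟨h.2, by omega, by omega⟩ : ((i : Int), j) ≠ (c, d))]
          simp only [List.lookup_append]
          have h3 : List.lookup (i, j) ((PySem.List.pyRange (d - 1) b (-1)).map (fun j => ((c, j), cellGet bd c (j + 1)))) = none :=
            lookup_map_not_mem _ _ _ _ (by
              intro x hx h; rw [Prod.mk.injEq] at h; rw [PySem.List.mem_pyRange_neg_one] at hx
              exact c3 ⟨h.1.symm, by omega, by omega⟩)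
          rw [h3]
          rw [lookup_cons_ne (by intro h; rw [Prod.mk.injEq] at h; exact c3 ⟨h.1, by omega, by omega⟩ : ((i : Int), j) ≠ (c, b))]
          have h4 : List.lookup (i, j) ((PySem.List.pyRange (c - 1) a (-1)).map (fun i => ((i, b), cellGet bd (i + 1) b))) = none :=
            lookup_map_not_mem _ _ _ _ (by
              intro x hx h; rw [Prod.mk.injEq] at h; rw [PySem.List.mem_pyRange_neg_one] at hx
              exact c4 ⟨h.2.symm, by omega, by omega⟩)
          rw [h4]
          rfl

lemma nodup_seg_asc (f : Int → Int × Int) (s t : Int) (hinj : ∀ x y, f x = f y → x = y) :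
    (((PySem.List.pyRange s t 1).map f)).Nodup :=
  List.Nodup.map (fun x y h => hinj x y h) (PySem.List.nodup_pyRange_one s t)

lemma nodup_seg_desc (f : Int → Int × Int) (s t : Int) (hinj : ∀ x y, f x = f y → x = y) :
    (((PySem.List.pyRange t s (-1)).map f)).Nodup := by
  rw [PySem.List.pyRange_neg_one_eq_reverse, List.map_reverse]
  exact List.nodup_reverse.mpr (nodup_seg_asc f _ _ hinj)

lemma mem_seg_asc {f : Int → Int × Int} {s t : Int} {p : Int × Int}
    (hp : p ∈ (PySem.List.pyRange s t 1).map f) : ∃ x, s ≤ x ∧ x < t ∧ f x = p := by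
  obtain ⟨x, hx, hfx⟩ := List.mem_map.mp hp
  rw [PySem.List.mem_pyRange_one] at hx
  exact ⟨x, hx.1, hx.2, hfx⟩

lemma mem_seg_desc {f : Int → Int × Int} {s t : Int} {p : Int × Int}
    (hp : p ∈ (PySem.List.pyRange t s (-1)).map f) : ∃ x, s < x ∧ x ≤ t ∧ f x = p := by
  obtain ⟨x, hx, hfx⟩ := List.mem_map.mp hp
  rw [PySem.List.mem_pyRange_neg_one] at hx
  exact ⟨x, hx.1, hx.2, hfx⟩

lemma nodup_keys0 {a b c d : Int} (hac : a < c) (hbd : b < d) : (keys0 a b c d).Nodup := by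
  unfold keys0
  rw [List.append_assoc, List.append_assoc]
  have hT := nodup_seg_asc (fun j => ((a : Int), j)) b d (by intro x y h; rw [Prod.mk.injEq] at h; exact h.2)
  have hR := nodup_seg_asc (fun i => (i, (d : Int))) a c (by intro x y h; rw [Prod.mk.injEq] at h; exact h.1)
  have hB := nodup_seg_desc (fun j => ((c : Int), j)) b d (by intro x y h; rw [Prod.mk.injEq] at h; exact h.2)
  have hL := nodup_seg_desc (fun i => (i, (b : Int))) a c (by intro x y h; rw [Prod.mk.injEq] at h; exact h.1)
  have hBL : ((PySem.List.pyRange d b (-1)).map (fun j => ((c : Int), j)) ++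
      (PySem.List.pyRange c a (-1)).map (fun i => (i, (b : Int)))).Nodup := by
    refine List.Nodup.append hB hL ?_
    rw [List.disjoint_left]
    intro p hp hq
    obtain ⟨x, hx1, hx2, rfl⟩ := mem_seg_desc hp
    obtain ⟨y, hy1, hy2, h⟩ := mem_seg_desc hq
    rw [Prod.mk.injEq] at h
    omega
  have hRBL : ((PySem.List.pyRange a c 1).map (fun i => (i, (d : Int))) ++
      ((PySem.List.pyRange d b (-1)).map (fun j => ((c : Int), j)) ++
       (PySem.List.pyRange c a (-1)).map (fun i => (i, (b : Int))))).Nodup := by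
    refine List.Nodup.append hR hBL ?_
    rw [List.disjoint_left]
    intro p hp hq
    obtain ⟨x, hx1, hx2, rfl⟩ := mem_seg_asc hp
    rcases List.mem_append.mp hq with hq | hq
    · obtain ⟨y, hy1, hy2, h⟩ := mem_seg_desc hq
      rw [Prod.mk.injEq] at h
      omega
    · obtain ⟨y, hy1, hy2, h⟩ := mem_seg_desc hq
      rw [Prod.mk.injEq] at h
      omega
  refine List.Nodup.append hT hRBL ?_
  rw [List.disjoint_left]
  intro p hp hq
  obtain ⟨x, hx1, hx2, rfl⟩ := mem_seg_asc hp
  rcases List.mem_append.mp hq with hq | hq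
  · obtain ⟨y, hy1, hy2, h⟩ := mem_seg_asc hq
    rw [Prod.mk.injEq] at h
    omega
  · rcases List.mem_append.mp hq with hq | hq
    · obtain ⟨y, hy1, hy2, h⟩ := mem_seg_desc hq
      rw [Prod.mk.injEq] at h
      omega
    · obtain ⟨y, hy1, hy2, h⟩ := mem_seg_desc hq
      rw [Prod.mk.injEq] at h
      omega

lemma length_keys0_values {bd : List (List Int)} {a b c d : Int} (hac : a < c) (hbd : b < d) :
    ([cellGet bd (a + 1) b] ++ ((keys0 a b c d).map (fun p => cellGet bd p.1 p.2)).dropLast).length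
      = (keys0 a b c d).length := by
  have hne : keys0 a b c d ≠ [] := by
    unfold keys0
    intro h
    rw [List.append_eq_nil_iff] at h
    have := h.1
    rw [List.append_eq_nil_iff] at this
    have := this.1
    rw [List.append_eq_nil_iff] at this
    have h2 := this.1
    rw [List.map_eq_nil_iff] at h2
    rw [PySem.List.pyRange_one_cons hbd] at h2
    exact List.cons_ne_nil _ _ h2
  simp only [List.length_append, List.length_cons, List.length_nil, List.length_dropLast, List.length_map]
  have : 0 < (keys0 a b c d).length := List.length_pos_iff.mpr hne
  omega

lemma fst_pairsA {bd : List (List Int)} {a b c d : Int} (hac : a < c) (hbd : b < d) :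
    (pairsA bd a b c d).map Prod.fst = keys0 a b c d := by
  unfold pairsA
  exact List.map_fst_zip (le_of_eq (length_keys0_values hac hbd).symm)

lemma nodup_fst_pairsB {bd : List (List Int)} {a b c d : Int} (hac : a < c) (hbd : b < d) :
    ((pairsB bd a b c d).map Prod.fst).Nodup := by
  unfold pairsB
  simp only [List.map_append, List.map_map]
  rw [List.append_assoc, List.append_assoc, List.append_assoc]
  have r1 : (PySem.List.pyRange a c 1).map (Prod.fst ∘ fun i => ((i, (b : Int)), cellGet bd (i + 1) b)) =
      (PySem.List.pyRange a c 1).map (fun i => (i, (b : Int))) := rfl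
  have r2 : (PySem.List.pyRange b d 1).map (Prod.fst ∘ fun j => (((c : Int), j), cellGet bd c (j + 1))) =
      (PySem.List.pyRange b d 1).map (fun j => ((c : Int), j)) := rfl
  have r3 : (PySem.List.pyRange c a (-1)).map (Prod.fst ∘ fun i => ((i, (d : Int)), cellGet bd (i - 1) d)) =
      (PySem.List.pyRange c a (-1)).map (fun i => (i, (d : Int))) := rfl
  have r4 : (PySem.List.pyRange d (b + 1) (-1)).map (Prod.fst ∘ fun j => (((a : Int), j), cellGet bd a (j - 1))) =
      (PySem.List.pyRange d (b + 1) (-1)).map (fun j => ((a : Int), j)) := rfl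
  have r5 : List.map (Prod.fst (α := Int × Int) (β := Int)) [(((a : Int), b + 1), cellGet bd a b)] = [((a : Int), b + 1)] := rfl
  rw [r1, r2, r3, r4, r5]
  have hS1 := nodup_seg_asc (fun i => (i, (b : Int))) a c (by intro x y h; rw [Prod.mk.injEq] at h; exact h.1)
  have hS2 := nodup_seg_asc (fun j => ((c : Int), j)) b d (by intro x y h; rw [Prod.mk.injEq] at h; exact h.2)
  have hS3 := nodup_seg_desc (fun i => (i, (d : Int))) a c (by intro x y h; rw [Prod.mk.injEq] at h; exact h.1)
  have hS4 := nodup_seg_desc (fun j => ((a : Int), j)) (b + 1) d (by intro x y h; rw [Prod.mk.injEq] at h; exact h.2)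
  have h45 : ((PySem.List.pyRange d (b + 1) (-1)).map (fun j => ((a : Int), j)) ++ [((a : Int), b + 1)]).Nodup := by
    refine List.Nodup.append hS4 (List.nodup_singleton _) ?_
    rw [List.disjoint_left]
    intro p hp hq
    obtain ⟨y, hy1, hy2, h⟩ := mem_seg_desc hp
    rw [List.mem_singleton] at hq
    rw [← h] at hq
    rw [Prod.mk.injEq] at hq
    omega
  have h345 : ((PySem.List.pyRange c a (-1)).map (fun i => (i, (d : Int))) ++
      ((PySem.List.pyRange d (b + 1) (-1)).map (fun j => ((a : Int), j)) ++ [((a : Int), b + 1)])).Nodup := by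
    refine List.Nodup.append hS3 h45 ?_
    rw [List.disjoint_left]
    intro p hp hq
    obtain ⟨y, hy1, hy2, rfl⟩ := mem_seg_desc hp
    rcases List.mem_append.mp hq with hq | hq
    · obtain ⟨z, hz1, hz2, h⟩ := mem_seg_desc hq
      rw [Prod.mk.injEq] at h
      omega
    · rw [List.mem_singleton, Prod.mk.injEq] at hq
      omega
  have h2345 : ((PySem.List.pyRange b d 1).map (fun j => ((c : Int), j)) ++
      ((PySem.List.pyRange c a (-1)).map (fun i => (i, (d : Int))) ++
       ((PySem.List.pyRange d (b + 1) (-1)).map (fun j => ((a : Int), j)) ++ [((a : Int), b + 1)]))).Nodup := by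
    refine List.Nodup.append hS2 h345 ?_
    rw [List.disjoint_left]
    intro p hp hq
    obtain ⟨y, hy1, hy2, rfl⟩ := mem_seg_asc hp
    rcases List.mem_append.mp hq with hq | hq
    · obtain ⟨z, hz1, hz2, h⟩ := mem_seg_desc hq
      rw [Prod.mk.injEq] at h
      omega
    · rcases List.mem_append.mp hq with hq | hq
      · obtain ⟨z, hz1, hz2, h⟩ := mem_seg_desc hq
        rw [Prod.mk.injEq] at h
        omega
      · rw [List.mem_singleton, Prod.mk.injEq] at hq
        omega
  refine List.Nodup.append hS1 h2345 ?_
  rw [List.disjoint_left]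
  intro p hp hq
  obtain ⟨y, hy1, hy2, rfl⟩ := mem_seg_asc hp
  rcases List.mem_append.mp hq with hq | hq
  · obtain ⟨z, hz1, hz2, h⟩ := mem_seg_asc hq
    rw [Prod.mk.injEq] at h
    omega
  · rcases List.mem_append.mp hq with hq | hq
    · obtain ⟨z, hz1, hz2, h⟩ := mem_seg_desc hq
      rw [Prod.mk.injEq] at h
      omega
    · rcases List.mem_append.mp hq with hq | hq
      · obtain ⟨z, hz1, hz2, h⟩ := mem_seg_desc hq
        rw [Prod.mk.injEq] at h
        omega
      · rw [List.mem_singleton, Prod.mk.injEq] at hq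
        omega

lemma mem_keys0 {a b c d : Int} (hac : a < c) (hbd : b < d) {p : Int × Int} (hp : p ∈ keys0 a b c d) :
    a ≤ p.1 ∧ p.1 ≤ c ∧ b ≤ p.2 ∧ p.2 ≤ d := by
  unfold keys0 at hp
  rcases List.mem_append.mp hp with hp | hp
  · rcases List.mem_append.mp hp with hp | hp
    · rcases List.mem_append.mp hp with hp | hp
      · obtain ⟨x, h1, h2, rfl⟩ := mem_seg_asc hp
        dsimp only
        omega
      · obtain ⟨x, h1, h2, rfl⟩ := mem_seg_asc hp
        dsimp only
        omega
    · obtain ⟨x, h1, h2, rfl⟩ := mem_seg_desc hp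
      dsimp only
      omega
  · obtain ⟨x, h1, h2, rfl⟩ := mem_seg_desc hp
    dsimp only
    omega

lemma posOK_pairsA {R C : Nat} {bd : List (List Int)} {a b c d : Int} (hac : a < c) (hbd : b < d)
    (h0a : 0 ≤ a) (hcR : c < (R : Int)) (h0b : 0 ≤ b) (hdC : d < (C : Int)) :
    PosOK R C (pairsA bd a b c d) := by
  intro pv hpv
  have h1 : pv.1 ∈ (pairsA bd a b c d).map Prod.fst := List.mem_map_of_mem hpv
  rw [fst_pairsA hac hbd] at h1
  have h2 := mem_keys0 hac hbd h1
  exact ⟨⟨by omega, by omega⟩, by omega, by omega⟩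

lemma posOK_pairsB {R C : Nat} {bd : List (List Int)} {a b c d : Int} (hac : a < c) (hbd : b < d)
    (h0a : 0 ≤ a) (hcR : c < (R : Int)) (h0b : 0 ≤ b) (hdC : d < (C : Int)) :
    PosOK R C (pairsB bd a b c d) := by
  intro pv hpv
  unfold pairsB at hpv
  rcases List.mem_append.mp hpv with hpv | hpv
  · rcases List.mem_append.mp hpv with hpv | hpv
    · rcases List.mem_append.mp hpv with hpv | hpv
      · rcases List.mem_append.mp hpv with hpv | hpv
        · obtain ⟨x, hx, rfl⟩ := List.mem_map.mp hpv
          rw [PySem.List.mem_pyRange_one] at hx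
          exact ⟨⟨by dsimp only; omega, by dsimp only; omega⟩, by dsimp only; omega, by dsimp only; omega⟩
        · obtain ⟨x, hx, rfl⟩ := List.mem_map.mp hpv
          rw [PySem.List.mem_pyRange_one] at hx
          exact ⟨⟨by dsimp only; omega, by dsimp only; omega⟩, by dsimp only; omega, by dsimp only; omega⟩
      · obtain ⟨x, hx, rfl⟩ := List.mem_map.mp hpv
        rw [PySem.List.mem_pyRange_neg_one] at hx
        exact ⟨⟨by dsimp only; omega, by dsimp only; omega⟩, by dsimp only; omega, by dsimp only; omega⟩
    · obtain ⟨x, hx, rfl⟩ := List.mem_map.mp hpv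
      rw [PySem.List.mem_pyRange_neg_one] at hx
      exact ⟨⟨by dsimp only; omega, by dsimp only; omega⟩, by dsimp only; omega, by dsimp only; omega⟩
  · rw [List.mem_singleton] at hpv
    rw [hpv]
    exact ⟨⟨by dsimp only; omega, by dsimp only; omega⟩, by dsimp only; omega, by dsimp only; omega⟩

lemma W_pairsA_eq_W_pairsB {R C : Nat} {bd : List (List Int)} (hs : Shape R C bd)
    {a b c d : Int} (hac : a < c) (hbd : b < d)
    (h0a : 0 ≤ a) (hcR : c < (R : Int)) (h0b : 0 ≤ b) (hdC : d < (C : Int)) :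
    W bd (pairsA bd a b c d) = W bd (pairsB bd a b c d) := by
  have hpA : PosOK R C (pairsA bd a b c d) := posOK_pairsA hac hbd h0a hcR h0b hdC
  have hpB : PosOK R C (pairsB bd a b c d) := posOK_pairsB hac hbd h0a hcR h0b hdC
  have hndA : ((pairsA bd a b c d).map Prod.fst).Nodup := by
    rw [fst_pairsA hac hbd]; exact nodup_keys0 hac hbd
  apply boards_ext (shape_W hs hpA) (shape_W hs hpB)
  intro i j hi hj
  rw [cellGet_W hs hpA hndA hi hj, cellGet_W hs hpB (nodup_fst_pairsB hac hbd) hi hj,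
    lookup_pairsA hac hbd, lookup_pairsB hac hbd]

lemma min?_perm {l1 l2 : List Int} (h : l1.Perm l2) :
    PySem.List.min? l1 (fun v => v) = PySem.List.min? l2 (fun v => v) := by
  cases l1 with
  | nil =>
    have hl2 : l2 = [] := List.Perm.eq_nil h.symm
    rw [hl2]
  | cons x t =>
    have hne1 : x :: t ≠ [] := List.cons_ne_nil _ _
    have hne2 : l2 ≠ [] := by
      intro he
      subst he
      exact hne1 (List.Perm.eq_nil h)
    cases hm1 : PySem.List.min? (x :: t) (fun v => v) with
    | none => rw [PySem.List.min?_eq_none_iff] at hm1; exact absurd hm1 hne1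
    | some m1 =>
      cases hm2 : PySem.List.min? l2 (fun v => v) with
      | none => rw [PySem.List.min?_eq_none_iff] at hm2; exact absurd hm2 hne2
      | some m2 =>
        have e1 : m1 ∈ l2 := h.subset (PySem.List.min?_mem hm1)
        have e2 : m2 ∈ x :: t := h.symm.subset (PySem.List.min?_mem hm2)
        have le1 : m1 ≤ m2 := PySem.List.min?_isMin hm1 m2 e2
        have le2 : m2 ≤ m1 := PySem.List.min?_isMin hm2 m1 e1
        rw [le_antisymm le1 le2]

lemma perm_rev4 {α : Type} (l1 l2 l3 l4 : List α) :
    (l1 ++ (l2 ++ (l3 ++ l4))).Perm (l4 ++ (l3 ++ (l2 ++ l1))) := by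
  refine (List.perm_append_comm).trans ?_
  rw [List.append_assoc]
  refine (List.perm_append_comm).trans ?_
  rw [List.append_assoc, List.append_assoc]
  refine (List.perm_append_comm).trans ?_
  rw [List.append_assoc]
  refine List.Perm.append_left l4 ?_
  refine (List.perm_append_comm).trans ?_
  exact List.Perm.append_left l3 List.perm_append_comm

-- ---- steps and assembly ----

lemma pairwise_gt_pyRange_neg_one (a b : Int) :
    (PySem.List.pyRange a b (-1)).Pairwise (fun x y => y < x) := by
  rw [PySem.List.pyRange_neg_one_eq_reverse, List.pairwise_reverse]
  exact PySem.List.pairwise_lt_pyRange_one _ _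

lemma getLast?_keys0 {a b c d : Int} (hac : a < c) :
    (keys0 a b c d).getLast? = some (a + 1, b) := by
  unfold keys0
  have hLne : (PySem.List.pyRange c a (-1)).map (fun i => (i, (b : Int))) ≠ [] := by
    rw [PySem.List.pyRange_neg_one_cons hac]
    exact List.cons_ne_nil _ _
  rw [List.getLast?_append_of_ne_nil _ hLne]
  rw [PySem.List.pyRange_neg_one_eq_reverse, List.map_reverse, List.getLast?_reverse, List.head?_map,
    PySem.List.pyRange_one_cons (by omega : a + 1 < c + 1)]
  rfl

lemma keys0_ne_nil {a b c d : Int} (hac : a < c) (hbd : b < d) : keys0 a b c d ≠ [] := by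
  intro h
  have := getLast?_keys0 (b := b) (d := d) hac
  rw [h] at this
  simp at this

lemma shape_mkBoard (rows columns : Int) : Shape rows.toNat columns.toNat (mkBoard rows columns) := by
  constructor
  · simp [mkBoard, PySem.List.length_pyRange_one]
  · intro r hr
    obtain ⟨i, hi, rfl⟩ := List.mem_map.mp hr
    simp [PySem.List.length_pyRange_one]

lemma write_loop_eq (K : List (Int × Int)) (vs : List Int) (bd : List (List Int)) (hlen : K.length = vs.length) :
    (PySem.List.pyRange 0 (K.length : Int) 1).foldl (fun b2 i =>
      cellSet b2 ((PySem.List.pyGetD K i ((0 : Int), (0 : Int))).1 - 1)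
        ((PySem.List.pyGetD K i ((0 : Int), (0 : Int))).2 - 1) (PySem.List.pyGetD vs i 0)) bd
    = W bd ((K.map (fun p => (p.1 - 1, p.2 - 1))).zip vs) := by
  set Z := (K.map (fun p => (p.1 - 1, p.2 - 1))).zip vs with hZ
  have hlz : Z.length = K.length := by
    simp [hZ, hlen]
  have hcong : ∀ (acc : List (List Int)), ∀ i ∈ PySem.List.pyRange 0 (K.length : Int) 1,
      (fun b2 i => cellSet b2 ((PySem.List.pyGetD K i ((0 : Int), (0 : Int))).1 - 1)
        ((PySem.List.pyGetD K i ((0 : Int), (0 : Int))).2 - 1) (PySem.List.pyGetD vs i 0)) acc i =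
      (fun b2 i => (fun (b3 : List (List Int)) (pv : (Int × Int) × Int) =>
        cellSet b3 pv.1.1 pv.1.2 pv.2) b2 (PySem.List.pyGetD Z i (((0 : Int), (0 : Int)), (0 : Int)))) acc i := by
    intro acc i hi
    rw [PySem.List.mem_pyRange_one] at hi
    have hiK : i < (K.length : Int) := hi.2
    have hiZ : i < (Z.length : Int) := by omega
    have hiv : i < (vs.length : Int) := by omega
    have him : i < ((K.map (fun p => (p.1 - 1, p.2 - 1))).length : Int) := by
      rw [List.length_map]; omega
    dsimp only
    rw [PySem.List.pyGetD_eq_getElem K _ hi.1 hiK, PySem.List.pyGetD_eq_getElem vs _ hi.1 hiv,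
      PySem.List.pyGetD_eq_getElem Z _ hi.1 hiZ]
    simp only [hZ, List.getElem_zip, List.getElem_map]
  rw [PySem.List.foldl_congr_mem _ _ _ _ hcong]
  have hlen2 : (K.length : Int) = PySem.List.len Z := by
    simp [PySem.List.len, hlz]
  rw [hlen2]
  rw [PySem.List.foldl_pyRange_pyGetD Z (((0 : Int), (0 : Int)), (0 : Int))
    (fun b3 pv => cellSet b3 pv.1.1 pv.1.2 pv.2) bd (le_refl 0)]
  rw [Int.toNat_zero, List.drop_zero]
  rfl

lemma stepA_eq {R C : Nat} {bd : List (List Int)} (hs : Shape R C bd) (ans : List Int)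
    {x1 y1 x2 y2 : Int} (h1 : 1 ≤ x1) (h2 : x1 < x2) (h3 : x2 ≤ (R : Int))
    (h4 : 1 ≤ y1) (h5 : y1 < y2) (h6 : y2 ≤ (C : Int)) :
    stepA (bd, ans) (x1, y1, x2, y2) =
      (W bd (pairsA bd (x1 - 1) (y1 - 1) (x2 - 1) (y2 - 1)),
       ans ++ [qmin bd (x1 - 1) (y1 - 1) (x2 - 1) (y2 - 1)]) := by
  have hac : x1 - 1 < x2 - 1 := by omega
  have hbd2 : y1 - 1 < y2 - 1 := by omega
  simp only [stepA]
  rw [PySem.List.foldl_append_singleton_eq_map, List.nil_append]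
  -- the 1-based key list, shifted down, is keys0
  have hkm : (((PySem.List.pyRange y1 y2 1).map (fun y => (x1, y)) ++
      (PySem.List.pyRange x1 x2 1).map (fun x => (x, y2)) ++
      (PySem.List.pyRange y2 y1 (-1)).map (fun y => (x2, y)) ++
      ((PySem.List.pyRange (x1 + 1) (x2 + 1) 1).map (fun x => (x, y1))).reverse)).map
        (fun p => (p.1 - 1, p.2 - 1)) = keys0 (x1 - 1) (y1 - 1) (x2 - 1) (y2 - 1) := by
    rw [List.map_append, List.map_append, List.map_append, List.map_reverse]
    unfold keys0
    congr 1
    congr 1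
    congr 1
    · rw [List.map_map]
      conv_rhs => rw [show y1 - 1 = y1 + (-1) from by ring, show y2 - 1 = y2 + (-1) from by ring]
      rw [← rngMapShift y1 y2 (-1) (fun j => (x1 - 1, j))]
      apply List.map_congr_left
      intro x _
      simp only [Function.comp_apply]
      norm_num
      ring
    · rw [List.map_map]
      conv_rhs => rw [show x1 - 1 = x1 + (-1) from by ring, show x2 - 1 = x2 + (-1) from by ring]
      rw [← rngMapShift x1 x2 (-1) (fun i => (i, y2 - 1))]
      apply List.map_congr_left
      intro x _
      simp only [Function.comp_apply]
      norm_num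
      ring
    · rw [List.map_map]
      conv_rhs => rw [show y2 - 1 = y2 + (-1) from by ring, show y1 - 1 = y1 + (-1) from by ring]
      rw [← rngMapShiftNeg y2 y1 (-1) (fun j => (x2 - 1, j))]
      apply List.map_congr_left
      intro x _
      simp only [Function.comp_apply]
      norm_num
      ring
    · rw [List.map_map, revAsc]
      conv_rhs => rw [show x2 - 1 = (x2 + 1) - 1 + (-1) from by ring, show x1 - 1 = (x1 + 1) - 1 + (-1) from by ring]
      rw [← rngMapShiftNeg ((x2 + 1) - 1) ((x1 + 1) - 1) (-1) (fun i => (i, y1 - 1))]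
      apply List.map_congr_left
      intro x _
      simp only [Function.comp_apply]
      norm_num
      ring
  have hvals : (((PySem.List.pyRange y1 y2 1).map (fun y => (x1, y)) ++
      (PySem.List.pyRange x1 x2 1).map (fun x => (x, y2)) ++
      (PySem.List.pyRange y2 y1 (-1)).map (fun y => (x2, y)) ++
      ((PySem.List.pyRange (x1 + 1) (x2 + 1) 1).map (fun x => (x, y1))).reverse)).map
        (fun p => cellGet bd (p.1 - 1) (p.2 - 1)) =
      (keys0 (x1 - 1) (y1 - 1) (x2 - 1) (y2 - 1)).map (fun p => cellGet bd p.1 p.2) := by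
    rw [← hkm, List.map_map]
    rfl
  rw [hvals]
  have hVne : (keys0 (x1 - 1) (y1 - 1) (x2 - 1) (y2 - 1)).map (fun p => cellGet bd p.1 p.2) ≠ [] := by
    rw [ne_eq, List.map_eq_nil_iff]
    exact keys0_ne_nil hac hbd2
  rw [PySem.List.pyGetD_neg_one _ 0 hVne, PySem.List.slice_to_neg_one]
  have hVlast : ((keys0 (x1 - 1) (y1 - 1) (x2 - 1) (y2 - 1)).map (fun p => cellGet bd p.1 p.2)).getLast hVne
      = cellGet bd (x1 - 1 + 1) (y1 - 1) := by
    apply getLast_of_getLast?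
    rw [List.getLast?_map, getLast?_keys0 hac]
    rfl
  rw [hVlast]
  rw [Prod.mk.injEq]
  refine ⟨?_, ?_⟩
  · -- boards
    have hlen' : (((PySem.List.pyRange y1 y2 1).map (fun y => (x1, y)) ++
        (PySem.List.pyRange x1 x2 1).map (fun x => (x, y2)) ++
        (PySem.List.pyRange y2 y1 (-1)).map (fun y => (x2, y)) ++
        ((PySem.List.pyRange (x1 + 1) (x2 + 1) 1).map (fun x => (x, y1))).reverse)).length =
        ([cellGet bd (x1 - 1 + 1) (y1 - 1)] ++
          ((keys0 (x1 - 1) (y1 - 1) (x2 - 1) (y2 - 1)).map (fun p => cellGet bd p.1 p.2)).dropLast).length := by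
      rw [← hkm]
      have hpos : 0 < (((PySem.List.pyRange y1 y2 1).map (fun y => (x1, y)) ++
        (PySem.List.pyRange x1 x2 1).map (fun x => (x, y2)) ++
        (PySem.List.pyRange y2 y1 (-1)).map (fun y => (x2, y)) ++
        ((PySem.List.pyRange (x1 + 1) (x2 + 1) 1).map (fun x => (x, y1))).reverse)).length := by
        rw [List.length_pos_iff]
        intro hnil
        have : (((PySem.List.pyRange y1 y2 1).map (fun y => (x1, y)) ++
          (PySem.List.pyRange x1 x2 1).map (fun x => (x, y2)) ++
          (PySem.List.pyRange y2 y1 (-1)).map (fun y => (x2, y)) ++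
          ((PySem.List.pyRange (x1 + 1) (x2 + 1) 1).map (fun x => (x, y1))).reverse)).map
            (fun p => (p.1 - 1, p.2 - 1)) = [] := by rw [hnil]; rfl
        rw [hkm] at this
        exact keys0_ne_nil hac hbd2 this
      simp only [List.length_append, List.length_cons, List.length_nil, List.length_dropLast,
        List.length_map] at hpos ⊢
      omega
    rw [write_loop_eq _ _ bd hlen', hkm]
    rfl
  · -- min
    congr 1
    have hperm : ([cellGet bd (x1 - 1 + 1) (y1 - 1)] ++
        ((keys0 (x1 - 1) (y1 - 1) (x2 - 1) (y2 - 1)).map (fun p => cellGet bd p.1 p.2)).dropLast).Perm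
        ((keys0 (x1 - 1) (y1 - 1) (x2 - 1) (y2 - 1)).map (fun p => cellGet bd p.1 p.2)) := by
      rw [List.singleton_append, ← hVlast]
      have := List.dropLast_concat_getLast hVne
      conv_rhs => rw [← this]
      exact (List.perm_append_singleton _ _).symm
    rw [min?_perm hperm]
    rfl

lemma W_snoc (bd : List (List Int)) (D : List ((Int × Int) × Int)) (p q v : Int) :
    cellSet (W bd D) p q v = W bd (D ++ [((p, q), v)]) := by
  rw [W_append]
  rfl

lemma loopB_gen {R C : Nat} (bd0 : List (List Int)) (hs : Shape R C bd0) (wp rp : Int → Int × Int) :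
    ∀ (l : List Int) (done : List ((Int × Int) × Int)) (m : Int),
    PosOK R C done →
    (∀ i ∈ l, InR R (wp i).1 ∧ InR C (wp i).2 ∧ InR R (rp i).1 ∧ InR C (rp i).2) →
    (∀ i ∈ l, (rp i) ∉ done.map Prod.fst) →
    l.Pairwise (fun i j => rp j ≠ wp i) →
    l.foldl (fun (p : List (List Int) × Int) i =>
        (cellSet p.1 (wp i).1 (wp i).2 (cellGet p.1 (rp i).1 (rp i).2),
         if cellGet p.1 (rp i).1 (rp i).2 < p.2 then cellGet p.1 (rp i).1 (rp i).2 else p.2))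
      (W bd0 done, m)
    = (W bd0 (done ++ l.map (fun i => (wp i, cellGet bd0 (rp i).1 (rp i).2))),
       (l.map (fun i => cellGet bd0 (rp i).1 (rp i).2)).foldl (fun m v => if v < m then v else m) m) := by
  intro l
  induction l with
  | nil =>
    intro done m _ _ _ _
    simp
  | cons i t ih =>
    intro done m hdone hbounds hnm hpw
    have hb := hbounds i List.mem_cons_self
    have hv : cellGet (W bd0 done) (rp i).1 (rp i).2 = cellGet bd0 (rp i).1 (rp i).2 := by
      apply cellGet_W_not_mem hs hdone hb.2.2.1 hb.2.2.2
      have := hnm i List.mem_cons_self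
      simpa using this
    rw [List.foldl_cons]
    simp only [List.map_cons]
    rw [List.foldl_cons]
    rw [hv]
    have hset : cellSet (W bd0 done) (wp i).1 (wp i).2 (cellGet bd0 (rp i).1 (rp i).2) =
        W bd0 (done ++ [(wp i, cellGet bd0 (rp i).1 (rp i).2)]) := by
      rw [W_append]
      rfl
    rw [hset]
    rw [List.pairwise_cons] at hpw
    rw [ih (done ++ [(wp i, cellGet bd0 (rp i).1 (rp i).2)]) _
      (by
        intro pv hpv
        rcases List.mem_append.mp hpv with h | h
        · exact hdone pv h
        · rw [List.mem_singleton] at h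
          rw [h]
          exact ⟨hb.1, hb.2.1⟩)
      (fun j hj => hbounds j (List.mem_cons_of_mem _ hj))
      (by
        intro j hj
        rw [List.map_append, List.mem_append]
        rintro (h | h)
        · exact hnm j (List.mem_cons_of_mem _ hj) h
        · simp only [List.map_cons, List.map_nil, List.mem_singleton] at h
          exact hpw.1 j hj h)
      hpw.2]
    rw [List.append_assoc]
    rfl

lemma stepB_eq {R C : Nat} {bd : List (List Int)} (hs : Shape R C bd) (ans : List Int)
    {x1 y1 x2 y2 : Int} (h1 : 1 ≤ x1) (h2 : x1 < x2) (h3 : x2 ≤ (R : Int))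
    (h4 : 1 ≤ y1) (h5 : y1 < y2) (h6 : y2 ≤ (C : Int)) :
    stepB (bd, ans) (x1, y1, x2, y2) =
      (W bd (pairsB bd (x1 - 1) (y1 - 1) (x2 - 1) (y2 - 1)),
       ans ++ [qmin bd (x1 - 1) (y1 - 1) (x2 - 1) (y2 - 1)]) := by
  have hac : x1 - 1 < x2 - 1 := by omega
  have hbd2 : y1 - 1 < y2 - 1 := by omega
  simp only [stepB]
  have e1 := loopB_gen bd hs (fun i => (i, y1 - 1)) (fun i => (i + 1, y1 - 1))
    (PySem.List.pyRange (x1 - 1) (x2 - 1) 1) [] (cellGet bd (x1 - 1) (y1 - 1))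
    (by intro pv hpv; cases hpv)
    (by
      intro i hi
      rw [PySem.List.mem_pyRange_one] at hi
      exact ⟨⟨by dsimp only; omega, by dsimp only; omega⟩, ⟨by dsimp only; omega, by dsimp only; omega⟩,
        ⟨by dsimp only; omega, by dsimp only; omega⟩, by dsimp only; omega, by dsimp only; omega⟩)
    (by intro i _ h; cases h)
    (by
      refine List.Pairwise.imp ?_ (PySem.List.pairwise_lt_pyRange_one (x1 - 1) (x2 - 1))
      intro i j hij h
      rw [Prod.mk.injEq] at h
      omega)
  rw [show W bd [] = bd from rfl, List.nil_append] at e1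
  rw [e1]
  set ps1 := (PySem.List.pyRange (x1 - 1) (x2 - 1) 1).map
    (fun i => (((i, y1 - 1) : Int × Int), cellGet bd ((i + 1, y1 - 1) : Int × Int).1 ((i + 1, y1 - 1) : Int × Int).2)) with hps1
  set m1 := ((PySem.List.pyRange (x1 - 1) (x2 - 1) 1).map
    (fun i => cellGet bd ((i + 1, y1 - 1) : Int × Int).1 ((i + 1, y1 - 1) : Int × Int).2)).foldl
    (fun m v => if v < m then v else m) (cellGet bd (x1 - 1) (y1 - 1)) with hm1
  have e2 := loopB_gen bd hs (fun j => (x2 - 1, j)) (fun j => (x2 - 1, j + 1))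
    (PySem.List.pyRange (y1 - 1) (y2 - 1) 1) ps1 m1
    (by
      intro pv hpv
      rw [hps1] at hpv
      obtain ⟨x, hx, rfl⟩ := List.mem_map.mp hpv
      rw [PySem.List.mem_pyRange_one] at hx
      exact ⟨⟨by dsimp only; omega, by dsimp only; omega⟩, by dsimp only; omega, by dsimp only; omega⟩)
    (by
      intro j hj
      rw [PySem.List.mem_pyRange_one] at hj
      exact ⟨⟨by dsimp only; omega, by dsimp only; omega⟩, ⟨by dsimp only; omega, by dsimp only; omega⟩,
        ⟨by dsimp only; omega, by dsimp only; omega⟩, by dsimp only; omega, by dsimp only; omega⟩)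
    (by
      intro j hj hmem
      rw [PySem.List.mem_pyRange_one] at hj
      rw [hps1, List.map_map] at hmem
      obtain ⟨x, hx, h⟩ := List.mem_map.mp hmem
      rw [PySem.List.mem_pyRange_one] at hx
      simp only [Function.comp_apply, Prod.mk.injEq] at h
      omega)
    (by
      refine List.Pairwise.imp ?_ (PySem.List.pairwise_lt_pyRange_one (y1 - 1) (y2 - 1))
      intro i j hij h
      rw [Prod.mk.injEq] at h
      omega)
  rw [e2]
  set ps2 := (PySem.List.pyRange (y1 - 1) (y2 - 1) 1).map
    (fun j => (((x2 - 1, j) : Int × Int), cellGet bd ((x2 - 1, j + 1) : Int × Int).1 ((x2 - 1, j + 1) : Int × Int).2)) with hps2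
  set m2 := ((PySem.List.pyRange (y1 - 1) (y2 - 1) 1).map
    (fun j => cellGet bd ((x2 - 1, j + 1) : Int × Int).1 ((x2 - 1, j + 1) : Int × Int).2)).foldl
    (fun m v => if v < m then v else m) m1 with hm2
  have e3 := loopB_gen bd hs (fun i => (i, y2 - 1)) (fun i => (i - 1, y2 - 1))
    (PySem.List.pyRange (x2 - 1) (x1 - 1) (-1)) (ps1 ++ ps2) m2
    (by
      intro pv hpv
      rcases List.mem_append.mp hpv with hpv | hpv
      · rw [hps1] at hpv
        obtain ⟨x, hx, rfl⟩ := List.mem_map.mp hpv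
        rw [PySem.List.mem_pyRange_one] at hx
        exact ⟨⟨by dsimp only; omega, by dsimp only; omega⟩, by dsimp only; omega, by dsimp only; omega⟩
      · rw [hps2] at hpv
        obtain ⟨x, hx, rfl⟩ := List.mem_map.mp hpv
        rw [PySem.List.mem_pyRange_one] at hx
        exact ⟨⟨by dsimp only; omega, by dsimp only; omega⟩, by dsimp only; omega, by dsimp only; omega⟩)
    (by
      intro i hi
      rw [PySem.List.mem_pyRange_neg_one] at hi
      exact ⟨⟨by dsimp only; omega, by dsimp only; omega⟩, ⟨by dsimp only; omega, by dsimp only; omega⟩,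
        ⟨by dsimp only; omega, by dsimp only; omega⟩, by dsimp only; omega, by dsimp only; omega⟩)
    (by
      intro i hi hmem
      rw [PySem.List.mem_pyRange_neg_one] at hi
      rw [List.map_append, List.mem_append] at hmem
      rcases hmem with hmem | hmem
      · rw [hps1, List.map_map] at hmem
        obtain ⟨x, hx, h⟩ := List.mem_map.mp hmem
        rw [PySem.List.mem_pyRange_one] at hx
        simp only [Function.comp_apply, Prod.mk.injEq] at h
        omega
      · rw [hps2, List.map_map] at hmem
        obtain ⟨x, hx, h⟩ := List.mem_map.mp hmem
        rw [PySem.List.mem_pyRange_one] at hx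
        simp only [Function.comp_apply, Prod.mk.injEq] at h
        omega)
    (by
      refine List.Pairwise.imp ?_ (pairwise_gt_pyRange_neg_one (x2 - 1) (x1 - 1))
      intro i j hij h
      rw [Prod.mk.injEq] at h
      omega)
  rw [List.append_assoc] at e3
  rw [e3]
  set ps3 := (PySem.List.pyRange (x2 - 1) (x1 - 1) (-1)).map
    (fun i => (((i, y2 - 1) : Int × Int), cellGet bd ((i - 1, y2 - 1) : Int × Int).1 ((i - 1, y2 - 1) : Int × Int).2)) with hps3
  set m3 := ((PySem.List.pyRange (x2 - 1) (x1 - 1) (-1)).map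
    (fun i => cellGet bd ((i - 1, y2 - 1) : Int × Int).1 ((i - 1, y2 - 1) : Int × Int).2)).foldl
    (fun m v => if v < m then v else m) m2 with hm3
  have e4 := loopB_gen bd hs (fun j => (x1 - 1, j)) (fun j => (x1 - 1, j - 1))
    (PySem.List.pyRange (y2 - 1) (y1 - 1 + 1) (-1)) (ps1 ++ (ps2 ++ ps3)) m3
    (by
      intro pv hpv
      rcases List.mem_append.mp hpv with hpv | hpv
      · rw [hps1] at hpv
        obtain ⟨x, hx, rfl⟩ := List.mem_map.mp hpv
        rw [PySem.List.mem_pyRange_one] at hx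
        exact ⟨⟨by dsimp only; omega, by dsimp only; omega⟩, by dsimp only; omega, by dsimp only; omega⟩
      · rcases List.mem_append.mp hpv with hpv | hpv
        · rw [hps2] at hpv
          obtain ⟨x, hx, rfl⟩ := List.mem_map.mp hpv
          rw [PySem.List.mem_pyRange_one] at hx
          exact ⟨⟨by dsimp only; omega, by dsimp only; omega⟩, by dsimp only; omega, by dsimp only; omega⟩
        · rw [hps3] at hpv
          obtain ⟨x, hx, rfl⟩ := List.mem_map.mp hpv
          rw [PySem.List.mem_pyRange_neg_one] at hx
          exact ⟨⟨by dsimp only; omega, by dsimp only; omega⟩, by dsimp only; omega, by dsimp only; omega⟩)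
    (by
      intro j hj
      rw [PySem.List.mem_pyRange_neg_one] at hj
      exact ⟨⟨by dsimp only; omega, by dsimp only; omega⟩, ⟨by dsimp only; omega, by dsimp only; omega⟩,
        ⟨by dsimp only; omega, by dsimp only; omega⟩, by dsimp only; omega, by dsimp only; omega⟩)
    (by
      intro j hj hmem
      rw [PySem.List.mem_pyRange_neg_one] at hj
      rw [List.map_append, List.mem_append] at hmem
      rcases hmem with hmem | hmem
      · rw [hps1, List.map_map] at hmem
        obtain ⟨x, hx, h⟩ := List.mem_map.mp hmem
        rw [PySem.List.mem_pyRange_one] at hx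
        simp only [Function.comp_apply, Prod.mk.injEq] at h
        omega
      · rw [List.map_append, List.mem_append] at hmem
        rcases hmem with hmem | hmem
        · rw [hps2, List.map_map] at hmem
          obtain ⟨x, hx, h⟩ := List.mem_map.mp hmem
          rw [PySem.List.mem_pyRange_one] at hx
          simp only [Function.comp_apply, Prod.mk.injEq] at h
          omega
        · rw [hps3, List.map_map] at hmem
          obtain ⟨x, hx, h⟩ := List.mem_map.mp hmem
          rw [PySem.List.mem_pyRange_neg_one] at hx
          simp only [Function.comp_apply, Prod.mk.injEq] at h
          omega)
    (by
      refine List.Pairwise.imp ?_ (pairwise_gt_pyRange_neg_one (y2 - 1) (y1 - 1 + 1))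
      intro i j hij h
      rw [Prod.mk.injEq] at h
      omega)
  rw [List.append_assoc] at e4
  rw [e4]
  dsimp only
  rw [Prod.mk.injEq]
  refine ⟨?_, ?_⟩
  · -- boards
    rw [W_snoc]
    unfold pairsB
    rw [hps1, hps2, hps3]
    simp only [List.append_assoc]
  · -- min
    congr 1
    rw [hm3, hm2, hm1]
    rw [← List.foldl_append, ← List.foldl_append, ← List.foldl_append]
    congr 1
    have hfmin : (fun (m v : Int) => if v < m then v else m) = (fun (m v : Int) => min m v) := by
      funext m v
      rw [min_def]
      split_ifs <;> omega
    rw [hfmin]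
    have hM1 : List.map (fun i => cellGet bd ((i + 1, y1 - 1) : Int × Int).1 ((i + 1, y1 - 1) : Int × Int).2)
        (PySem.List.pyRange (x1 - 1) (x2 - 1) 1) =
        (PySem.List.pyRange (x1 - 1 + 1) (x2 - 1 + 1) 1).map (fun i => cellGet bd i (y1 - 1)) := by
      rw [← rngMapShift (x1 - 1) (x2 - 1) 1 (fun i => cellGet bd i (y1 - 1))]
    have hM2 : List.map (fun j => cellGet bd ((x2 - 1, j + 1) : Int × Int).1 ((x2 - 1, j + 1) : Int × Int).2)
        (PySem.List.pyRange (y1 - 1) (y2 - 1) 1) =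
        (PySem.List.pyRange (y1 - 1 + 1) (y2 - 1 + 1) 1).map (fun j => cellGet bd (x2 - 1) j) := by
      rw [← rngMapShift (y1 - 1) (y2 - 1) 1 (fun j => cellGet bd (x2 - 1) j)]
    have hM3 : List.map (fun i => cellGet bd ((i - 1, y2 - 1) : Int × Int).1 ((i - 1, y2 - 1) : Int × Int).2)
        (PySem.List.pyRange (x2 - 1) (x1 - 1) (-1)) =
        ((PySem.List.pyRange (x1 - 1) (x2 - 1) 1).map (fun i => cellGet bd i (y2 - 1))).reverse := by
      rw [revAsc]
      conv_rhs => rw [show x2 - 1 - 1 = (x2 - 1) + (-1) from by ring, show x1 - 1 - 1 = (x1 - 1) + (-1) from by ring]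
      rw [← rngMapShiftNeg (x2 - 1) (x1 - 1) (-1) (fun i => cellGet bd i (y2 - 1))]
      rfl
    have hM4 : List.map (fun i => cellGet bd (x1 - 1) (i - 1))
        (PySem.List.pyRange (y2 - 1) (y1 - 1 + 1) (-1)) =
        ((PySem.List.pyRange (y1 - 1 + 1) (y2 - 1) 1).map (fun j => cellGet bd (x1 - 1) j)).reverse := by
      rw [revAsc]
      conv_rhs => rw [show y2 - 1 - 1 = (y2 - 1) + (-1) from by ring, show y1 - 1 + 1 - 1 = (y1 - 1 + 1) + (-1) from by ring]
      rw [← rngMapShiftNeg (y2 - 1) (y1 - 1 + 1) (-1) (fun j => cellGet bd (x1 - 1) j)]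
      rfl
    rw [hM1, hM2, hM3, hM4]
    have hVsplit : (keys0 (x1 - 1) (y1 - 1) (x2 - 1) (y2 - 1)).map (fun p => cellGet bd p.1 p.2) =
        cellGet bd (x1 - 1) (y1 - 1) ::
          ((PySem.List.pyRange (y1 - 1 + 1) (y2 - 1) 1).map (fun j => cellGet bd (x1 - 1) j) ++
           ((PySem.List.pyRange (x1 - 1) (x2 - 1) 1).map (fun i => cellGet bd i (y2 - 1)) ++
            (((PySem.List.pyRange (y1 - 1 + 1) (y2 - 1 + 1) 1).map (fun j => cellGet bd (x2 - 1) j)).reverse ++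
             ((PySem.List.pyRange (x1 - 1 + 1) (x2 - 1 + 1) 1).map (fun i => cellGet bd i (y1 - 1))).reverse))) := by
      unfold keys0
      simp only [List.map_append, List.map_map, List.append_assoc]
      rw [PySem.List.pyRange_one_cons hbd2]
      rw [PySem.List.pyRange_neg_one_eq_reverse, PySem.List.pyRange_neg_one_eq_reverse]
      simp only [List.map_cons, List.map_reverse, List.cons_append]
      rfl
    have hperm : (cellGet bd (x1 - 1) (y1 - 1) ::
        ((PySem.List.pyRange (x1 - 1 + 1) (x2 - 1 + 1) 1).map (fun i => cellGet bd i (y1 - 1)) ++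
         ((PySem.List.pyRange (y1 - 1 + 1) (y2 - 1 + 1) 1).map (fun j => cellGet bd (x2 - 1) j) ++
          (((PySem.List.pyRange (x1 - 1) (x2 - 1) 1).map (fun i => cellGet bd i (y2 - 1))).reverse ++
           ((PySem.List.pyRange (y1 - 1 + 1) (y2 - 1) 1).map (fun j => cellGet bd (x1 - 1) j)).reverse)))).Perm
        ((keys0 (x1 - 1) (y1 - 1) (x2 - 1) (y2 - 1)).map (fun p => cellGet bd p.1 p.2)) := by
      rw [hVsplit]
      apply List.Perm.cons
      refine (perm_rev4 _ _ _ _).trans ?_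
      exact List.Perm.append (List.reverse_perm _)
        (List.Perm.append (List.reverse_perm _)
          (List.Perm.append (List.reverse_perm _).symm (List.reverse_perm _).symm))
    unfold qmin
    rw [← min?_perm hperm, PySem.List.min?_id_cons]
    rfl

lemma fold_eq {R C : Nat} :
    ∀ (qs : List (Int × Int × Int × Int)) (bd : List (List Int)) (ans : List Int),
    Shape R C bd →
    (∀ q ∈ qs, 1 ≤ q.1 ∧ q.1 < q.2.2.1 ∧ q.2.2.1 ≤ (R : Int) ∧ 1 ≤ q.2.1 ∧ q.2.1 < q.2.2.2 ∧ q.2.2.2 ≤ (C : Int)) →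
    qs.foldl stepA (bd, ans) = qs.foldl stepB (bd, ans) := by
  intro qs
  induction qs with
  | nil => intro bd ans _ _; rfl
  | cons q t ih =>
    intro bd ans hs hq
    obtain ⟨x1, y1, x2, y2⟩ := q
    have hpre := hq _ List.mem_cons_self
    have h1 : 1 ≤ x1 := hpre.1
    have h2 : x1 < x2 := hpre.2.1
    have h3 : x2 ≤ (R : Int) := hpre.2.2.1
    have h4 : 1 ≤ y1 := hpre.2.2.2.1
    have h5 : y1 < y2 := hpre.2.2.2.2.1
    have h6 : y2 ≤ (C : Int) := hpre.2.2.2.2.2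
    have hac : x1 - 1 < x2 - 1 := by omega
    have hbd2 : y1 - 1 < y2 - 1 := by omega
    have h0a : (0 : Int) ≤ x1 - 1 := by omega
    have hcR : x2 - 1 < (R : Int) := by omega
    have h0b : (0 : Int) ≤ y1 - 1 := by omega
    have hdC : y2 - 1 < (C : Int) := by omega
    rw [List.foldl_cons, List.foldl_cons, stepA_eq hs ans h1 h2 h3 h4 h5 h6,
      stepB_eq hs ans h1 h2 h3 h4 h5 h6]
    rw [W_pairsA_eq_W_pairsB hs hac hbd2 h0a hcR h0b hdC]
    exact ih _ _ (shape_W hs (posOK_pairsB hac hbd2 h0a hcR h0b hdC))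
      (fun q hq2 => hq q (List.mem_cons_of_mem _ hq2))


-- ===== VERDICT (by name: the statement is the Claim_ definition above) =====
theorem solution_spec : Claim_equal_solution := by
  intro rows columns queries _ hpre
  unfold Spec_solution solution solution_alt
  have h : ∀ q ∈ queries, 1 ≤ q.1 ∧ q.1 < q.2.2.1 ∧ q.2.2.1 ≤ ((rows.toNat : Nat) : Int) ∧
      1 ≤ q.2.1 ∧ q.2.1 < q.2.2.2 ∧ q.2.2.2 ≤ ((columns.toNat : Nat) : Int) := by
    intro q hq
    obtain ⟨a1, a2, a3, a4, a5, a6⟩ := hpre q hq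
    refine ⟨a1, a2, ?_, a4, a5, ?_⟩ <;> omega
  rw [fold_eq queries (mkBoard rows columns) [] (shape_mkBoard rows columns) h]
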